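-- pv_equiv track=rewrite | github.com/robrogers3/python-tests | helpers/funcs.py | similar_word_groups
-- ===== SOURCE A (Python) =====
-- def similar_word_groups(words):
--     def explore(w):
--         visited.add(w)
--         for v in edges[w]:
--             if v not in visited:
--                 explore(v)
--
--     res, edges, visited = 0, {}, set()
--     for s in words:
--         if s not in edges:
--             edges[s] = set()
--             for t in words:
--                 if t == s:
--                     continue
--                 same = 0
--                 for i,c in enumerate(t):
--                     if c == s[i]: same += 1
--                 if same == len(s) - 2:
--                     edges[s].add(t)
--                     if t in edges:
--                         edges[t].add(s)
--                     else:
--                         edges[t] = {s}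
--     for s in words:
--         if s not in visited:
--             res += 1
--             explore(s)
--
--     return res
-- ===== SOURCE B (Python) =====
-- def _similar(s, t):
--     diffs = 0
--     for i in range(len(s)):
--         if s[i] != t[i]:
--             diffs += 1
--             if diffs > 2:
--                 return False
--     return diffs == 2
--
-- def similar_word_groups(words):
--     uniq = []
--     for w in words:
--         if w not in uniq:
--             uniq.append(w)
--     comps = []
--     for s in uniq:
--         merged = [s]
--         rest = []
--         for comp in comps:
--             hit = False
--             for t in comp:
--                 if _similar(s, t):
--                     hit = True
--                     break
--             if hit:
--                 merged.extend(comp)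
--             else:
--                 rest.append(comp)
--         rest.append(merged)
--         comps = rest
--     return len(comps)
-- ===== Notes on version B (the rewrite author's own statement) =====
-- stated objective: alternative
-- what changed: B replaces A's lazily-built dict-of-neighbour-sets plus recursive DFS with an incremental component-merging pass over the deduplicated words (each word absorbs every existing component containing a word it differs from in exactly two positions), with an early-exit index-loop difference counter; A skips the neighbour scan for any word it has already recorded as someone's neighbour and thereby drops edges between two never-scanned words, which B does not reproduce.
-- intended difference: On lists containing two words that differ in exactly two positions yet are not joined by the edges A actually records (A never scans a word that first entered its dict as a neighbour, so edges between two such words are lost), A returns a strictly larger group count than B; B returns the number of components of the full differ-in-exactly-2-positions graph, which is the intended value (e.g. ['ab','cd','ad','xb']: A=2, B=1). — e.g. on similar_word_groups(["ab", "cd", "ad", "xb"]): A returns 2, B returns 1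
-- outside the precondition, e.g. on similar_word_groups(['ab', '']): A returns 1, B returns 2; on similar_word_groups(['ab', 'x', 'cd']): A returns 1, B raises IndexError
import Mathlib
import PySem

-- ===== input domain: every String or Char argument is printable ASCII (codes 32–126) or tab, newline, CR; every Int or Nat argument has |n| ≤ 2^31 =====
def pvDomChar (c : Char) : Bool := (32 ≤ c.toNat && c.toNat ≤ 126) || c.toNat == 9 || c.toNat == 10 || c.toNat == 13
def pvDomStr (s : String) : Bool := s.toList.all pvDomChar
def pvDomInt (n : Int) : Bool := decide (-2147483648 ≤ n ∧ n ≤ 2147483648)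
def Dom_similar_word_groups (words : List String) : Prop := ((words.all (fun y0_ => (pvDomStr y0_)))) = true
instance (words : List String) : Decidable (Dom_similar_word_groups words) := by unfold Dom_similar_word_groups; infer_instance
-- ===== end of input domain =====

-- B replaces A's lazily-built dict of neighbour sets + recursive DFS by one incremental
-- component-merging pass over the deduplicated words (objective: alternative); on inputs in D_
-- below, A drops edges and over-counts, B returns the intended component count.

-- ===== PORT A =====
-- helper: the inner 'same' counter  (same += 1 for i,c in enumerate(t) if c == s[i]);
-- PySem.Str.pyGet? returns none exactly where Python raises IndexError — those inputs are outside Pre_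
def sameA (s t : String) : Int :=
  (PySem.List.enumerate t.toList).foldl (fun same ic =>
    match PySem.Str.pyGet? s ic.1 with
    | some c => if ic.2 == c then same + 1 else same
    | none => same) 0

-- helper: one iteration of A's inner 'for t in words' loop while scanning s
def innerStepA (s : String) (e : PySem.Dict String (PySem.Set String)) (t : String) :
    PySem.Dict String (PySem.Set String) :=
  if t == s then e
  else if sameA s t == PySem.Str.len s - 2 then
    let e1 := e.modify s PySem.Set.empty (fun st => PySem.Set.add st t)
    if e1.contains t then e1.modify t PySem.Set.empty (fun st => PySem.Set.add st s)
    else e1.insert t (PySem.Set.add PySem.Set.empty s)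
  else e

-- helper: one iteration of A's outer build loop ('if s not in edges: ...')
def buildStepA (words : List String) (edges : PySem.Dict String (PySem.Set String)) (s : String) :
    PySem.Dict String (PySem.Set String) :=
  if edges.contains s then edges
  else words.foldl (innerStepA s) (edges.insert s PySem.Set.empty)

-- helper: A's recursive 'explore' (visited.add(w); for v in edges[w]: if v not in visited: explore(v));
-- fuel only makes the recursion structural: each nested call adds an unvisited word, so
-- words.length + 1 fuel is never exhausted
def exploreA (d : PySem.Dict String (PySem.Set String)) :
    Nat → PySem.Set String → String → PySem.Set String
  | 0, vis, _ => vis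
  | f + 1, vis, w =>
    (d.getD w PySem.Set.empty).foldl
      (fun vis v => if PySem.Set.contains vis v then vis else exploreA d f vis v)
      (PySem.Set.add vis w)

def similar_word_groups (words : List String) : Int :=
  let edges := words.foldl (buildStepA words) PySem.Dict.empty
  (words.foldl (fun (acc : Int × PySem.Set String) s =>
      if PySem.Set.contains acc.2 s then acc
      else (acc.1 + 1, exploreA edges (words.length + 1) acc.2 s))
    (0, PySem.Set.empty)).1

-- ===== PORT B =====
-- helper: _similar(s, t) — difference counter over 'for i in range(len(s))', early exit after the
-- third mismatch; PySem.Str.pyGet? t i is none exactly where Python raises IndexError (t shorter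
-- than s) — those inputs are outside Pre_ and the port's value there is immaterial
def simLoopB (s t : String) : List Int → Int → Bool
  | [], diffs => diffs == 2
  | i :: rest, diffs =>
    match PySem.Str.pyGet? s i, PySem.Str.pyGet? t i with
    | some a, some b =>
      if a != b then
        if diffs + 1 > 2 then false else simLoopB s t rest (diffs + 1)
      else simLoopB s t rest diffs
    | _, _ => false

def simB (s t : String) : Bool :=
  simLoopB s t (PySem.List.pyRange 0 (PySem.Str.len s) 1) 0

-- helper: the inner 'hit' loop (for t in comp: if _similar(s, t): hit = True; break)
def hitB (s : String) : List String → Bool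
  | [] => false
  | t :: rest => if simB s t then true else hitB s rest

-- helper: the 'uniq' loop (for w in words: if w not in uniq: uniq.append(w))
def dedupB (words : List String) : List String :=
  words.foldl (fun uniq w => if w ∈ uniq then uniq else uniq ++ [w]) []

def similar_word_groups_alt (words : List String) : Int :=
  ((dedupB words).foldl
    (fun (comps : List (List String)) s =>
      let mr := comps.foldl
        (fun (mr : List String × List (List String)) comp =>
          if hitB s comp then (mr.1 ++ comp, mr.2) else (mr.1, mr.2 ++ [comp]))
        ([s], [])
      mr.2 ++ [mr.1])
    []).length

-- ===== PRECONDITION & SPEC =====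
-- spec-side vocabulary for D_ (independent of both ports):
-- 'x and y differ in exactly two positions' (on the common prefix)
def pvSimW (s t : String) : Bool := (s.data.zip t.data).countP (fun p => p.1 != p.2) == 2
-- the words A's outer loop actually scans: those with no earlier scanned similar word
def pvScan (ws : List String) : List String :=
  ws.foldl (fun a s => if a.any (pvSimW · s) then a else s :: a) []
-- x,y joined by the edges A records (similar pairs with a scanned endpoint), by saturation
abbrev pvConnA (ws : List String) (x y : String) : Prop :=
  y ∈ (fun S => S ++ ws.filter fun v => S.any fun u => pvSimW u v && decide (u ∈ pvScan ws ∨ v ∈ pvScan ws))^[ws.length] [x]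

-- Pre_ excludes lists whose words do not all have the same length: on those A raises IndexError
-- whenever a scanned word is compared with a longer one, and where it does return, the
-- match count over the shorter word's prefix is an accident of its loop.
def Pre_similar_word_groups (words : List String) : Prop :=
  ∀ s ∈ words, ∀ t ∈ words, s.toList.length = t.toList.length
instance (words : List String) : Decidable (Pre_similar_word_groups words) := by
  unfold Pre_similar_word_groups; infer_instance

def pvWitness_similar_word_groups : List String := ["ab", "ba", "zz"]

-- On lists with two words that differ in exactly two positions yet are not joined by the edges
-- A records (A never scans a word first met as a neighbour, dropping edges between two such
-- words), A returns a strictly larger count; B returns the number of components of the full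
-- similarity graph, which is the intended value.
def D_similar_word_groups (words : List String) : Prop :=
  ∃ x ∈ words, ∃ y ∈ words, pvSimW x y ∧ ¬ pvConnA words x y
instance (words : List String) : Decidable (D_similar_word_groups words) := by
  unfold D_similar_word_groups; infer_instance

def Spec_similar_word_groups (words : List String) (out : Int) : Prop :=
  ¬ D_similar_word_groups words → out = similar_word_groups_alt words
instance (words : List String) (out : Int) : Decidable (Spec_similar_word_groups words out) := by
  unfold Spec_similar_word_groups; infer_instance

def pvDiffWitness_similar_word_groups : List String := ["ab", "cd", "ad", "xb"]
def pvDiffWitnessOut_similar_word_groups : Int × Int := (2, 1)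

-- ===== CLAIM (what is proved, stated in full; the proofs are below) =====
def Claim_unchanged_similar_word_groups : Prop :=
  ∀ (words : List String), Dom_similar_word_groups words → Pre_similar_word_groups words →
    Spec_similar_word_groups words (similar_word_groups words)
def Claim_changed_similar_word_groups : Prop :=
  Dom_similar_word_groups (pvDiffWitness_similar_word_groups) ∧
  Pre_similar_word_groups (pvDiffWitness_similar_word_groups) ∧
  D_similar_word_groups (pvDiffWitness_similar_word_groups) ∧
  similar_word_groups (pvDiffWitness_similar_word_groups) = pvDiffWitnessOut_similar_word_groups.1 ∧
  similar_word_groups_alt (pvDiffWitness_similar_word_groups) = pvDiffWitnessOut_similar_word_groups.2 ∧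
  pvDiffWitnessOut_similar_word_groups.1 ≠ pvDiffWitnessOut_similar_word_groups.2
def Claim_exact_similar_word_groups : Prop :=
  ∀ (words : List String), Dom_similar_word_groups words → Pre_similar_word_groups words →
    D_similar_word_groups words → similar_word_groups words ≠ similar_word_groups_alt words

-- ===== LEMMAS AND PROOFS =====

-- proof-side vocabulary ----------------------------------------------------

-- the scanned words, the edges A records and saturation reachability, in the forms the
-- invariant proofs use (bridged to pvScan / pvConnA below)
def pvScanW (words : List String) : List String :=
  words.foldl (fun acc s => if s ∈ acc ∨ acc.any (fun v => pvSimW v s) then acc else acc ++ [s]) []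
def pvEdgeAW (words : List String) (x y : String) : Bool :=
  pvSimW x y && decide (x ∈ pvScanW words ∨ y ∈ pvScanW words)
def pvConnW (E : String → String → Bool) (words : List String) (x y : String) : Prop :=
  y ∈ (fun S => S ++ words.filter fun v => decide (v ∉ S) && S.any (E · v))^[words.length] [x]

-- the step relations of the two graphs, restricted to a vertex list
def StW (E : String → String → Bool) (ws : List String) (x y : String) : Prop :=
  x ∈ ws ∧ y ∈ ws ∧ E x y = true
def ConnW (E : String → String → Bool) (ws : List String) : String → String → Prop :=
  Relation.ReflTransGen (StW E ws)

-- first representatives: the elements with no earlier connected element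
noncomputable def repsList (C : String → String → Prop) : List String → List String → List String
  | _, [] => []
  | seen, s :: rest =>
    letI := Classical.propDecidable (∃ t ∈ seen, C t s)
    if ∃ t ∈ seen, C t s then repsList C (seen ++ [s]) rest
    else s :: repsList C (seen ++ [s]) rest

-- basic facts --------------------------------------------------------------

theorem pvSimW_def (s t : String) :
    pvSimW s t = ((s.toList.zip t.toList).countP (fun p => p.1 != p.2) == 2) := rfl

theorem pvSimW_symm (s t : String) : pvSimW s t = pvSimW t s := by
  rw [pvSimW_def, pvSimW_def]
  rw [← List.zip_swap t.toList s.toList, List.countP_map]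
  congr 1
  apply List.countP_congr
  intro p _
  simp [Function.comp, Prod.swap, bne, BEq.comm]

theorem simLoopB_eq (s t : String) (hlen : s.toList.length = t.toList.length) :
    ∀ (m k : Nat) (d : Int), 0 ≤ d → k + m = s.toList.length →
    simLoopB s t (PySem.List.pyRange (k : Int) (s.toList.length : Int) 1) d
      = decide (d + (((s.toList.drop k).zip (t.toList.drop k)).countP (fun p => p.1 != p.2) : Int) = 2) := by
  intro m
  induction m with
  | zero =>
    intro k d hd hk
    have hr : PySem.List.pyRange (k : Int) (s.toList.length : Int) 1 = [] := by
      rw [PySem.List.pyRange_one]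
      have : ((s.toList.length : Int) - k).toNat = 0 := by omega
      rw [this]
      simp
    rw [hr]
    have hdrop : s.toList.drop k = [] := List.drop_eq_nil_of_le (by omega)
    rw [hdrop]
    show (d == 2) = _
    simp only [List.zip_nil_left, List.countP_nil]
    by_cases h : d = 2 <;> simp [h]
  | succ m ih =>
    intro k d hd hk
    have hks : k < s.toList.length := by omega
    have hkt : k < t.toList.length := by omega
    have hr : PySem.List.pyRange (k : Int) (s.toList.length : Int) 1
        = (k : Int) :: PySem.List.pyRange ((k : Int) + 1) (s.toList.length : Int) 1 :=
      PySem.List.pyRange_one_cons (by exact_mod_cast hks)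
    rw [hr]
    have hgs : PySem.Str.pyGet? s (k : Int) = some s.toList[k] := by
      rw [PySem.Str.pyGet?_natCast]
      exact List.getElem?_eq_getElem hks
    have hgt : PySem.Str.pyGet? t (k : Int) = some t.toList[k] := by
      rw [PySem.Str.pyGet?_natCast]
      exact List.getElem?_eq_getElem hkt
    have hdrops : s.toList.drop k = s.toList[k] :: s.toList.drop (k + 1) :=
      List.drop_eq_getElem_cons hks
    have hdropt : t.toList.drop k = t.toList[k] :: t.toList.drop (k + 1) :=
      List.drop_eq_getElem_cons hkt
    have hcast : (k : Int) + 1 = ((k + 1 : Nat) : Int) := by push_cast; ring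
    have hstep : simLoopB s t ((k : Int) :: PySem.List.pyRange ((k : Int) + 1) (s.toList.length : Int) 1) d
        = (if s.toList[k] != t.toList[k] then
            (if d + 1 > 2 then false
             else simLoopB s t (PySem.List.pyRange ((k : Int) + 1) (s.toList.length : Int) 1) (d + 1))
           else simLoopB s t (PySem.List.pyRange ((k : Int) + 1) (s.toList.length : Int) 1) d) := by
      show (match PySem.Str.pyGet? s (k : Int), PySem.Str.pyGet? t (k : Int) with
        | some a, some b =>
          if a != b then
            if d + 1 > 2 then false
            else simLoopB s t (PySem.List.pyRange ((k : Int) + 1) (s.toList.length : Int) 1) (d + 1)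
          else simLoopB s t (PySem.List.pyRange ((k : Int) + 1) (s.toList.length : Int) 1) d
        | _, _ => false) = _
      rw [hgs, hgt]
    rw [hstep, hdrops, hdropt, List.zip_cons_cons, List.countP_cons]
    by_cases h : s.toList[k] = t.toList[k]
    · have h2 : (s.toList[k] != t.toList[k]) = false := by simp [bne_iff_ne, h]
      rw [h2]
      simp only [Bool.false_eq_true, if_false]
      rw [hcast, ih (k + 1) d hd (by omega)]
      simp [h2]
    · have h2 : (s.toList[k] != t.toList[k]) = true := by simp [bne_iff_ne, h]
      rw [h2, if_pos rfl]
      by_cases h3 : d + 1 > 2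
      · rw [if_pos h3]
        have hc : (0:Int) ≤ (((s.toList.drop (k+1)).zip (t.toList.drop (k+1))).countP (fun p => p.1 != p.2) : Int) := by
          positivity
        symm
        simp only [h2, if_true, decide_eq_false_iff_not]
        push_cast
        omega
      · rw [if_neg h3, hcast, ih (k + 1) (d + 1) (by omega) (by omega)]
        simp only [h2, if_true, decide_eq_decide]
        push_cast
        constructor <;> intro <;> omega

theorem simB_eq_pvSimW (s t : String) (hlen : s.toList.length = t.toList.length) :
    simB s t = pvSimW s t := by
  unfold simB
  have hstrlen : PySem.Str.len s = (s.toList.length : Int) := by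
    simp [PySem.Str.len_eq]
  rw [hstrlen, pvSimW_def]
  have h := simLoopB_eq s t hlen s.toList.length 0 0 (le_refl 0) (by omega)
  rw [List.drop_zero, List.drop_zero] at h
  have hcast : PySem.List.pyRange (0 : Int) (s.toList.length : Int) 1
      = PySem.List.pyRange ((0 : Nat) : Int) (s.toList.length : Int) 1 := rfl
  rw [hcast, h]
  generalize (s.toList.zip t.toList).countP (fun p => p.1 != p.2) = n
  rw [Bool.eq_iff_iff]
  simp only [decide_eq_true_eq, beq_iff_eq]
  omega

theorem hitB_any (s : String) : ∀ (l : List String), hitB s l = l.any (fun t => simB s t) := by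
  intro l
  induction l with
  | nil => rfl
  | cons t rest ih =>
    simp only [hitB, List.any_cons]
    by_cases h : simB s t = true <;> simp [h, ih]

theorem dedupB_eq (ws : List String) : dedupB ws = PySem.List.dedup ws := by
  have hofl : PySem.List.dedup ws = ws.foldl PySem.Set.add [] := by
    simp [PySem.List.dedup, PySem.Set.ofList, PySem.Set.empty]
  rw [hofl]
  unfold dedupB
  congr 1
  funext a x
  by_cases h : x ∈ a <;>
    simp [PySem.Set.add, PySem.Set.contains, List.contains_iff_mem, h]

theorem StW_symm (E : String → String → Bool) (hE : ∀ x y, E x y = E y x) (ws : List String) :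
    ∀ {x y}, StW E ws x y → StW E ws y x := by
  rintro x y ⟨hx, hy, h⟩
  exact ⟨hy, hx, by rw [hE y x]; exact h⟩

theorem ConnW_symm (E : String → String → Bool) (hE : ∀ x y, E x y = E y x) (ws : List String)
    {x y : String} (h : ConnW E ws x y) : ConnW E ws y x :=
  Relation.ReflTransGen.symmetric (fun _ _ hs => StW_symm E hE ws hs) h

-- proof-side name for the saturation step inside pvConnW
def pvGrowW (E : String → String → Bool) (words S : List String) : List String :=
  S ++ words.filter fun v => decide (v ∉ S) && S.any (E · v)

theorem grow_prefix (E) (U S : List String) : S <+: pvGrowW E U S := List.prefix_append _ _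

theorem mem_of_connW (E ws) {x z : String} (hx : x ∈ ws) (h : ConnW E ws x z) : z ∈ ws := by
  rcases h.cases_tail with h | ⟨c, _, hst⟩
  · exact h ▸ hx
  · exact hst.2.1

theorem grow_sound (E) (ws : List String) (x : String) (hx : x ∈ ws) :
    ∀ (S : List String), (∀ z ∈ S, ConnW E ws x z) → ∀ z ∈ pvGrowW E ws S, ConnW E ws x z := by
  intro S hS z hz
  rcases List.mem_append.1 hz with h | h
  · exact hS z h
  · rcases List.mem_filter.1 h with ⟨hzU, hcond⟩
    have hany : S.any (fun u => E u z) = true := by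
      simp only [Bool.and_eq_true] at hcond; exact hcond.2
    rcases List.any_eq_true.1 hany with ⟨u, huS, hE⟩
    exact (hS u huS).tail ⟨mem_of_connW E ws hx (hS u huS), hzU, hE⟩

theorem grow_closed_of_fix (E) (U S : List String) (hfix : pvGrowW E U S = S) :
    ∀ u ∈ S, ∀ v ∈ U, E u v = true → v ∈ S := by
  intro u hu v hv hE
  by_contra hvS
  have h0 : U.filter (fun v => decide (v ∉ S) && S.any (E · v)) = [] := by
    have := hfix
    unfold pvGrowW at this
    simpa using this
  have : v ∈ U.filter (fun v => decide (v ∉ S) && S.any (E · v)) := by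
    refine List.mem_filter.2 ⟨hv, ?_⟩
    simp only [Bool.and_eq_true]
    exact ⟨by simpa using hvS, List.any_eq_true.2 ⟨u, hu, hE⟩⟩
  rw [h0] at this
  simp at this

theorem iter_mem_mono (E) (U : List String) (x : String) {j k : Nat} (hjk : j ≤ k) :
    ∀ a ∈ (pvGrowW E U)^[j] [x], a ∈ (pvGrowW E U)^[k] [x] := by
  induction hjk with
  | refl => exact fun a ha => ha
  | step _ ih =>
    intro a ha
    rw [Function.iterate_succ_apply']
    exact (grow_prefix E U _).subset (ih a ha)

theorem iter_subset (E) (U : List String) (x : String) :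
    ∀ k, ∀ a ∈ (pvGrowW E U)^[k] [x], a ∈ x :: U := by
  intro k
  induction k with
  | zero => simp
  | succ k ih =>
    rw [Function.iterate_succ_apply']
    intro a ha
    rcases List.mem_append.1 ha with h | h
    · exact ih a h
    · exact List.mem_cons_of_mem _ (List.mem_filter.1 h).1

theorem iter_sound (E) (ws : List String) (x : String) (hx : x ∈ ws) :
    ∀ k, ∀ z ∈ (pvGrowW E ws)^[k] [x], ConnW E ws x z := by
  intro k
  induction k with
  | zero => intro z hz; simp at hz; exact hz ▸ Relation.ReflTransGen.refl
  | succ k ih =>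
    rw [Function.iterate_succ_apply']
    exact grow_sound E ws x hx _ ih

theorem iter_card (E) (U : List String) (x : String) :
    ∀ k, (∀ j < k, pvGrowW E U ((pvGrowW E U)^[j] [x]) ≠ (pvGrowW E U)^[j] [x]) →
      k + 1 ≤ ((pvGrowW E U)^[k] [x]).toFinset.card := by
  intro k
  induction k with
  | zero => simp
  | succ k ih =>
    intro h
    have hk := ih (fun j hj => h j (Nat.lt_succ_of_lt hj))
    rw [Function.iterate_succ_apply']
    have hne := h k (Nat.lt_succ_self k)
    set S := (pvGrowW E U)^[k] [x] with hSdef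
    rcases List.eq_nil_or_concat (U.filter (fun v => decide (v ∉ S) && S.any (E · v))) with hnil | ⟨l, a, hla⟩
    · exact absurd (show pvGrowW E U S = S by unfold pvGrowW; rw [hnil, List.append_nil]) hne
    · have haf : a ∈ U.filter (fun v => decide (v ∉ S) && S.any (E · v)) := by
        rw [hla]; simp
      have hanS : a ∉ S := by
        have := (List.mem_filter.1 haf).2
        simp only [Bool.and_eq_true, decide_eq_true_eq] at this
        exact this.1
      show k + 1 + 1 ≤ (pvGrowW E U S).toFinset.card
      unfold pvGrowW
      rw [List.toFinset_append]
      have hins : insert a S.toFinset ⊆ S.toFinset ∪ (U.filter (fun v => decide (v ∉ S) && S.any (E · v))).toFinset := by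
        intro b hb
        rcases Finset.mem_insert.1 hb with rfl | hb
        · exact Finset.mem_union.2 (Or.inr (List.mem_toFinset.2 haf))
        · exact Finset.mem_union.2 (Or.inl hb)
      have hcard1 : S.toFinset.card + 1 ≤ (insert a S.toFinset).card := by
        rw [Finset.card_insert_of_notMem (fun hc => hanS (List.mem_toFinset.1 hc))]
      have hcard2 := Finset.card_le_card hins
      omega

theorem iter_fix (E) (U : List String) (x : String) :
    pvGrowW E U ((pvGrowW E U)^[U.length] [x]) = (pvGrowW E U)^[U.length] [x] := by
  classical
  by_cases h : ∀ j < U.length, pvGrowW E U ((pvGrowW E U)^[j] [x]) ≠ (pvGrowW E U)^[j] [x]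
  · by_contra hne
    have h' : ∀ j < U.length + 1, pvGrowW E U ((pvGrowW E U)^[j] [x]) ≠ (pvGrowW E U)^[j] [x] := by
      intro j hj
      rcases Nat.lt_succ_iff_lt_or_eq.1 hj with hj | rfl
      · exact h j hj
      · exact hne
    have hcard := iter_card E U x (U.length + 1) h'
    have hsub : ((pvGrowW E U)^[U.length + 1] [x]).toFinset ⊆ (x :: U).toFinset := by
      intro a ha
      exact List.mem_toFinset.2 (iter_subset E U x (U.length + 1) a (List.mem_toFinset.1 ha))
    have h1 := Finset.card_le_card hsub
    have h2 := (x :: U).toFinset_card_le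
    simp only [List.length_cons] at h2
    omega
  · push Not at h
    rcases h with ⟨j, hj, hfix⟩
    have : (pvGrowW E U)^[U.length] [x] = (pvGrowW E U)^[j] [x] := by
      have : U.length = (U.length - j) + j := by omega
      rw [this, Function.iterate_add_apply]
      exact Function.iterate_fixed hfix _
    rw [this, hfix]

theorem pvConnW_iff (E : String → String → Bool) (ws : List String) (x y : String)
    (hx : x ∈ ws) : pvConnW E ws x y ↔ ConnW E ws x y := by
  have hconn : pvConnW E ws x y ↔ y ∈ (pvGrowW E ws)^[ws.length] [x] := Iff.rfl
  rw [hconn]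
  constructor
  · intro h
    exact iter_sound E ws x hx _ y h
  · intro h
    clear hconn
    induction h with
    | refl => exact iter_mem_mono E _ x (Nat.zero_le _) x (by simp)
    | tail hconn hst ih =>
      rename_i b c
      have hclosed := grow_closed_of_fix E _ _ (iter_fix E ws x)
      exact hclosed b ih c hst.2.1 hst.2.2

-- bridges: pvScan / pvConnA (the D_ vocabulary) to pvScanW / pvConnW -------

theorem scan_step_mem : ∀ (l a1 a2 : List String), (∀ z, z ∈ a1 ↔ z ∈ a2) →
    ∀ z, z ∈ l.foldl (fun a s => if a.any (pvSimW · s) then a else s :: a) a1 ↔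
         z ∈ l.foldl (fun acc s => if s ∈ acc ∨ acc.any (fun v => pvSimW v s) then acc else acc ++ [s]) a2 := by
  intro l
  induction l with
  | nil => exact fun a1 a2 h z => h z
  | cons s rest ih =>
    intro a1 a2 h z
    simp only [List.foldl_cons]
    have hany : a1.any (fun v => pvSimW v s) = a2.any (fun v => pvSimW v s) := by
      rw [Bool.eq_iff_iff]
      simp only [List.any_eq_true]
      constructor
      · rintro ⟨v, hv, hs⟩; exact ⟨v, (h v).1 hv, hs⟩
      · rintro ⟨v, hv, hs⟩; exact ⟨v, (h v).2 hv, hs⟩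
    by_cases ha : a2.any (fun v => pvSimW v s) = true
    · rw [if_pos (show a1.any (fun v => pvSimW v s) = true by rw [hany]; exact ha),
        if_pos (Or.inr ha)]
      exact ih a1 a2 h z
    · have ha1 : a1.any (fun v => pvSimW v s) = false := by
        rw [hany]
        cases hc : a2.any (fun v => pvSimW v s)
        · rfl
        · exact absurd hc ha
      rw [if_neg (show ¬ a1.any (fun v => pvSimW v s) = true by rw [ha1]; simp)]
      by_cases hs : s ∈ a2
      · rw [if_pos (Or.inl hs)]
        refine ih (s :: a1) a2 ?_ z
        intro u
        rw [List.mem_cons, h u]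
        constructor
        · rintro (rfl | hu)
          · exact hs
          · exact hu
        · exact fun hu => Or.inr hu
      · rw [if_neg (by rintro (hc | hc); exact hs hc; exact ha hc)]
        refine ih (s :: a1) (a2 ++ [s]) ?_ z
        intro u
        rw [List.mem_cons, List.mem_append, h u]
        simp only [List.mem_singleton]
        tauto

theorem mem_scan (ws : List String) (z : String) : z ∈ pvScan ws ↔ z ∈ pvScanW ws :=
  scan_step_mem ws [] [] (fun _ => Iff.rfl) z

theorem edge_eq (ws : List String) (u v : String) :
    (pvSimW u v && decide (u ∈ pvScan ws ∨ v ∈ pvScan ws)) = pvEdgeAW ws u v := by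
  unfold pvEdgeAW
  congr 1
  rw [decide_eq_decide, mem_scan, mem_scan]

theorem conn_step_mem (ws : List String) : ∀ (k : Nat) (S1 S2 : List String),
    (∀ z, z ∈ S1 ↔ z ∈ S2) →
    ∀ z, z ∈ (fun S => S ++ ws.filter fun v => S.any fun u => pvSimW u v && decide (u ∈ pvScan ws ∨ v ∈ pvScan ws))^[k] S1 ↔
         z ∈ (pvGrowW (pvEdgeAW ws) ws)^[k] S2 := by
  intro k
  induction k with
  | zero => exact fun S1 S2 h z => h z
  | succ k ih =>
    intro S1 S2 h z
    rw [Function.iterate_succ_apply, Function.iterate_succ_apply]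
    refine ih _ _ ?_ z
    intro u
    simp only [pvGrowW, List.mem_append, List.mem_filter, List.any_eq_true,
      Bool.and_eq_true, decide_eq_true_eq]
    constructor
    · rintro (hu | ⟨huw, w, hwS, hcond⟩)
      · exact Or.inl ((h u).1 hu)
      · by_cases huS : u ∈ S2
        · exact Or.inl huS
        · refine Or.inr ⟨huw, huS, w, (h w).1 hwS, ?_⟩
          have he : (pvSimW w u && decide (w ∈ pvScan ws ∨ u ∈ pvScan ws)) = true := by
            simp [hcond.1, hcond.2]
          rw [edge_eq ws w u] at he
          exact he
    · rintro (hu | ⟨huw, huS, w, hwS, he⟩)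
      · exact Or.inl ((h u).2 hu)
      · have he' : (pvSimW w u && decide (w ∈ pvScan ws ∨ u ∈ pvScan ws)) = true := by
          rw [edge_eq ws w u]; exact he
        simp only [Bool.and_eq_true, decide_eq_true_eq] at he'
        exact Or.inr ⟨huw, w, (h w).2 hwS, he'.1, he'.2⟩

theorem connA_iff (ws : List String) (x y : String) :
    pvConnA ws x y ↔ pvConnW (pvEdgeAW ws) ws x y :=
  conn_step_mem ws ws.length [x] [x] (fun _ => Iff.rfl) y

-- more basic facts ---------------------------------------------------------

theorem set_contains_iff (s : PySem.Set String) (x : String) :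
    PySem.Set.contains s x = true ↔ x ∈ s := by
  simp [PySem.Set.contains, List.contains_iff_mem]

theorem set_contains_add (s : PySem.Set String) (x y : String) :
    PySem.Set.contains (PySem.Set.add s x) y = true ↔ (PySem.Set.contains s y = true ∨ y = x) := by
  rw [set_contains_iff, PySem.Set.mem_add, set_contains_iff]

theorem mem_zip_self {l : List Char} : ∀ {p : Char × Char}, p ∈ l.zip l → p.1 = p.2 := by
  induction l with
  | nil => intro p hp; simp at hp
  | cons c t ih =>
    intro p hp
    rcases List.mem_cons.1 hp with rfl | hp
    · rfl
    · exact ih hp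

theorem pvSimW_self (s : String) : pvSimW s s = false := by
  rw [pvSimW_def]
  have h0 : (s.toList.zip s.toList).countP (fun p => p.1 != p.2) = 0 := by
    rw [List.countP_eq_zero]
    intro p hp
    simp [mem_zip_self hp]
  simp [h0]

-- the match counter of A's inner loop, in closed form ----------------------

theorem sameA_loop (s : String) :
    ∀ (tl : List Char) (k : Nat) (acc : Int), k + tl.length = s.toList.length →
    (PySem.List.enumerate tl (k : Int)).foldl
      (fun same ic =>
        match PySem.Str.pyGet? s ic.1 with
        | some c => if ic.2 == c then same + 1 else same
        | none => same) acc
    = acc + (((s.toList.drop k).zip tl).countP (fun p => p.2 == p.1) : Int) := by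
  intro tl
  induction tl with
  | nil =>
    intro k acc h
    simp [PySem.List.enumerate_nil]
  | cons c tl ih =>
    intro k acc h
    have hk : k < s.toList.length := by
      simp only [List.length_cons] at h
      omega
    rw [PySem.List.enumerate_cons, List.foldl_cons]
    have hg : PySem.Str.pyGet? s (k : Int) = some s.toList[k] := by
      rw [PySem.Str.pyGet?_natCast]
      exact List.getElem?_eq_getElem hk
    have hdrop : s.toList.drop k = s.toList[k] :: s.toList.drop (k + 1) :=
      List.drop_eq_getElem_cons hk
    have hcast : (k : Int) + 1 = ((k + 1 : Nat) : Int) := by push_cast; ring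
    rw [hcast]
    rw [ih (k + 1) _ (by simp only [List.length_cons] at h; omega)]
    rw [hdrop, List.zip_cons_cons, List.countP_cons]
    show (match PySem.Str.pyGet? s (k : Int) with
      | some ch => if c == ch then acc + 1 else acc
      | none => acc) + _ = _
    rw [hg]
    by_cases hc : (c == s.toList[k]) = true
    · simp only [hc, if_true, if_pos hc]
      push_cast
      ring
    · simp only [hc, if_false, Bool.false_eq_true, if_neg hc]
      push_cast
      ring

theorem sameA_eq (s t : String) (hlen : s.toList.length = t.toList.length) :
    sameA s t = ((s.toList.zip t.toList).countP (fun p => p.2 == p.1) : Int) := by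
  unfold sameA
  have h := sameA_loop s t.toList 0 0 (by simpa using hlen.symm)
  simpa using h

theorem sameA_cond (s t : String) (hlen : s.toList.length = t.toList.length) :
    ((sameA s t == PySem.Str.len s - 2) : Bool) = pvSimW s t := by
  rw [sameA_eq s t hlen, pvSimW_def]
  have hzlen : (s.toList.zip t.toList).length = s.toList.length := by
    rw [List.length_zip, hlen, min_self]
  have hcnt : ∀ (l : List (Char × Char)),
      l.countP (fun p => p.2 == p.1) + l.countP (fun p => p.1 != p.2) = l.length := by
    intro l
    induction l with
    | nil => rfl
    | cons p r ih =>
      obtain ⟨a, b⟩ := p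
      by_cases h : a = b
      · have h1 : (b == a) = true := by simp [h]
        have h2 : (a != b) = false := by simp [bne_iff_ne, h]
        simp [List.countP_cons, h1, h2]
        omega
      · have h1 : (b == a) = false := beq_eq_false_iff_ne.2 (fun hh => h hh.symm)
        have h2 : (a != b) = true := by simp [bne_iff_ne, h]
        simp [List.countP_cons, h1, h2]
        omega
  have hsum : (s.toList.zip t.toList).countP (fun p => p.2 == p.1)
      + (s.toList.zip t.toList).countP (fun p => p.1 != p.2) = s.toList.length := by
    rw [hcnt, hzlen]
  have hstrlen : PySem.Str.len s = (s.toList.length : Int) := by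
    simp [PySem.Str.len_eq]
  rw [Bool.eq_iff_iff]
  simp only [beq_iff_eq]
  rw [hstrlen]
  constructor <;> intro <;> omega

-- the "old" characterizations used through the build induction
def KOld (ws S : List String) (k : String) : Prop :=
  k ∈ S ∨ (k ∈ ws ∧ ∃ u ∈ S, pvSimW u k = true)
def MOld (ws S : List String) (k v : String) : Prop :=
  k ∈ ws ∧ v ∈ ws ∧ pvSimW k v = true ∧ (k ∈ S ∨ v ∈ S)

theorem innerA (ws : List String) (hpre : Pre_similar_word_groups ws) (s : String) (hs : s ∈ ws)
    (S : List String) :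
    ∀ (q : List String) (e : PySem.Dict String (PySem.Set String)), (∀ t ∈ q, t ∈ ws) →
    (∀ k, e.contains k = true ↔ (KOld ws S k ∨ k = s ∨ (k ∈ q ∧ pvSimW s k = true))) →
    (∀ k v, PySem.Set.contains (e.getD k PySem.Set.empty) v = true ↔
      (MOld ws S k v ∨ (k = s ∧ v ∈ q ∧ pvSimW s v = true) ∨ (v = s ∧ k ∈ q ∧ pvSimW s k = true))) →
    ∀ (rest : List String), (∀ t ∈ rest, t ∈ ws) →
    (∀ k, (rest.foldl (innerStepA s) e).contains k = true ↔
      (KOld ws S k ∨ k = s ∨ (k ∈ q ++ rest ∧ pvSimW s k = true))) ∧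
    (∀ k v, PySem.Set.contains ((rest.foldl (innerStepA s) e).getD k PySem.Set.empty) v = true ↔
      (MOld ws S k v ∨ (k = s ∧ v ∈ q ++ rest ∧ pvSimW s v = true) ∨ (v = s ∧ k ∈ q ++ rest ∧ pvSimW s k = true))) := by
  intro q e hq hK hM rest
  induction rest generalizing q e with
  | nil =>
    intro _
    rw [List.foldl_nil]
    constructor
    · intro k; rw [hK k, List.append_nil]
    · intro k v; rw [hM k v, List.append_nil]
  | cons t rest ih =>
    intro hrest
    have htws : t ∈ ws := hrest t List.mem_cons_self
    have hrest' : ∀ u ∈ rest, u ∈ ws := fun u hu => hrest u (List.mem_cons_of_mem _ hu)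
    have hgoal : ∀ (e' : PySem.Dict String (PySem.Set String)),
        (∀ k, e'.contains k = true ↔ (KOld ws S k ∨ k = s ∨ (k ∈ q ++ [t] ∧ pvSimW s k = true))) →
        (∀ k v, PySem.Set.contains (e'.getD k PySem.Set.empty) v = true ↔
          (MOld ws S k v ∨ (k = s ∧ v ∈ q ++ [t] ∧ pvSimW s v = true) ∨ (v = s ∧ k ∈ q ++ [t] ∧ pvSimW s k = true))) →
        (∀ k, (rest.foldl (innerStepA s) e').contains k = true ↔
          (KOld ws S k ∨ k = s ∨ (k ∈ (q ++ [t]) ++ rest ∧ pvSimW s k = true))) ∧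
        (∀ k v, PySem.Set.contains ((rest.foldl (innerStepA s) e').getD k PySem.Set.empty) v = true ↔
          (MOld ws S k v ∨ (k = s ∧ v ∈ (q ++ [t]) ++ rest ∧ pvSimW s v = true) ∨
            (v = s ∧ k ∈ (q ++ [t]) ++ rest ∧ pvSimW s k = true))) := by
      intro e' hK' hM'
      exact ih (q ++ [t]) e'
        (by intro u hu; rcases List.mem_append.1 hu with hu | hu
            · exact hq u hu
            · simp at hu; exact hu ▸ htws)
        hK' hM' hrest'
    have hmemqt : ∀ k : String, k ∈ q ++ [t] ↔ (k ∈ q ∨ k = t) := by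
      intro k; simp
    by_cases hts : t = s
    · -- 'if t == s: continue'
      have hstep : innerStepA s e t = e := by
        unfold innerStepA; simp [hts]
      rw [List.foldl_cons, hstep, List.append_cons q t rest]
      exact hgoal e
        (by
          intro k
          rw [hK k]
          constructor
          · rintro (h | h | ⟨hkq, hsim⟩)
            · exact Or.inl h
            · exact Or.inr (Or.inl h)
            · exact Or.inr (Or.inr ⟨(hmemqt k).2 (Or.inl hkq), hsim⟩)
          · rintro (h | h | ⟨hkq, hsim⟩)
            · exact Or.inl h
            · exact Or.inr (Or.inl h)
            · rcases (hmemqt k).1 hkq with hkq | rfl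
              · exact Or.inr (Or.inr ⟨hkq, hsim⟩)
              · rw [hts] at hsim; rw [pvSimW_self] at hsim; exact absurd hsim (by simp))
        (by
          intro k v
          rw [hM k v]
          constructor
          · rintro (h | ⟨rfl, hvq, hsim⟩ | ⟨rfl, hkq, hsim⟩)
            · exact Or.inl h
            · exact Or.inr (Or.inl ⟨rfl, (hmemqt v).2 (Or.inl hvq), hsim⟩)
            · exact Or.inr (Or.inr ⟨rfl, (hmemqt k).2 (Or.inl hkq), hsim⟩)
          · rintro (h | ⟨rfl, hvq, hsim⟩ | ⟨rfl, hkq, hsim⟩)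
            · exact Or.inl h
            · rcases (hmemqt v).1 hvq with hvq | rfl
              · exact Or.inr (Or.inl ⟨rfl, hvq, hsim⟩)
              · rw [hts] at hsim; rw [pvSimW_self] at hsim; exact absurd hsim (by simp)
            · rcases (hmemqt k).1 hkq with hkq | rfl
              · exact Or.inr (Or.inr ⟨rfl, hkq, hsim⟩)
              · rw [hts] at hsim; rw [pvSimW_self] at hsim; exact absurd hsim (by simp))
    · -- t ≠ s
      have hcond : ((sameA s t == PySem.Str.len s - 2) : Bool) = pvSimW s t :=
        sameA_cond s t (hpre s hs t htws)
      by_cases hsim : pvSimW s t = true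
      · -- an edge s ~ t is recorded
        set e1 := e.modify s PySem.Set.empty (fun st => PySem.Set.add st t) with he1
        have hstep : innerStepA s e t =
            (if e1.contains t then e1.modify t PySem.Set.empty (fun st => PySem.Set.add st s)
             else e1.insert t (PySem.Set.add PySem.Set.empty s)) := by
          unfold innerStepA
          rw [if_neg (by simp [hts]), hcond, if_pos hsim]
        rw [List.foldl_cons, hstep, List.append_cons q t rest]
        have hK1 : ∀ k, e1.contains k = true ↔ (k = s ∨ e.contains k = true) := by
          intro k
          rw [he1, PySem.Dict.contains_modify]
          simp
        have hM1 : ∀ k v, PySem.Set.contains (e1.getD k PySem.Set.empty) v = true ↔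
            ((k = s ∧ (v = t ∨ PySem.Set.contains (e.getD s PySem.Set.empty) v = true)) ∨
             (k ≠ s ∧ PySem.Set.contains (e.getD k PySem.Set.empty) v = true)) := by
          intro k v
          rw [he1, PySem.Dict.getD_modify]
          by_cases hks : k = s
          · rw [if_pos hks, hks]
            rw [set_contains_add]
            constructor
            · rintro (h | h)
              · exact Or.inl ⟨rfl, Or.inr h⟩
              · exact Or.inl ⟨rfl, Or.inl h⟩
            · rintro (⟨-, h | h⟩ | ⟨h, -⟩)
              · exact Or.inr h
              · exact Or.inl h
              · exact absurd rfl h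
          · rw [if_neg hks]
            constructor
            · intro h; exact Or.inr ⟨hks, h⟩
            · rintro (⟨rfl, -⟩ | ⟨-, h⟩)
              · exact absurd rfl hks
              · exact h
        -- the result of the 'if t in edges' branch, uniformly
        have hbranch : ∀ (e2 : PySem.Dict String (PySem.Set String)),
            (e2 = (if e1.contains t then e1.modify t PySem.Set.empty (fun st => PySem.Set.add st s)
                   else e1.insert t (PySem.Set.add PySem.Set.empty s))) →
            (∀ k, e2.contains k = true ↔ (k = t ∨ e1.contains k = true)) ∧
            (∀ k v, PySem.Set.contains (e2.getD k PySem.Set.empty) v = true ↔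
              ((k = t ∧ (v = s ∨ PySem.Set.contains (e1.getD t PySem.Set.empty) v = true)) ∨
               (k ≠ t ∧ PySem.Set.contains (e1.getD k PySem.Set.empty) v = true))) := by
          intro e2 he2
          by_cases hct : e1.contains t = true
          · rw [if_pos hct] at he2
            constructor
            · intro k
              rw [he2, PySem.Dict.contains_modify]
              simp
            · intro k v
              rw [he2, PySem.Dict.getD_modify]
              by_cases hkt : k = t
              · rw [if_pos hkt, hkt]
                rw [set_contains_add]
                constructor
                · rintro (h | h)
                  · exact Or.inl ⟨rfl, Or.inr h⟩
                  · exact Or.inl ⟨rfl, Or.inl h⟩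
                · rintro (⟨-, h | h⟩ | ⟨h, -⟩)
                  · exact Or.inr h
                  · exact Or.inl h
                  · exact absurd rfl h
              · rw [if_neg hkt]
                refine ⟨fun h => Or.inr ⟨hkt, h⟩, ?_⟩
                rintro (⟨hk, -⟩ | ⟨-, h⟩)
                · exact absurd hk hkt
                · exact h
          · rw [if_neg hct] at he2
            have hgetDt : e1.getD t PySem.Set.empty = PySem.Set.empty :=
              PySem.Dict.getD_of_not_contains _ _ (by cases h : e1.contains t; rfl; exact absurd h hct)
            constructor
            · intro k
              rw [he2, PySem.Dict.contains_insert]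
              simp
            · intro k v
              rw [he2, PySem.Dict.getD_insert]
              by_cases hkt : k = t
              · rw [if_pos hkt, hkt]
                rw [set_contains_add]
                constructor
                · rintro (h | h)
                  · exact absurd h (by simp [PySem.Set.contains, PySem.Set.empty])
                  · exact Or.inl ⟨rfl, Or.inl h⟩
                · rintro (⟨-, h | h⟩ | ⟨h, -⟩)
                  · exact Or.inr h
                  · rw [hgetDt] at h; exact absurd h (by simp [PySem.Set.contains, PySem.Set.empty])
                  · exact absurd rfl h
              · rw [if_neg hkt]
                refine ⟨fun h => Or.inr ⟨hkt, h⟩, ?_⟩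
                rintro (⟨hk, -⟩ | ⟨-, h⟩)
                · exact absurd hk hkt
                · exact h
        obtain ⟨hK2, hM2⟩ := hbranch _ rfl
        apply hgoal
        · intro k
          rw [hK2 k]
          constructor
          · rintro (hkt | h)
            · exact Or.inr (Or.inr ⟨(hmemqt k).2 (Or.inr hkt), by rw [hkt]; exact hsim⟩)
            · rcases (hK1 k).1 h with hks | h
              · exact Or.inr (Or.inl hks)
              · rcases (hK k).1 h with h | hks | ⟨hkq, hsimk⟩
                · exact Or.inl h
                · exact Or.inr (Or.inl hks)
                · exact Or.inr (Or.inr ⟨(hmemqt k).2 (Or.inl hkq), hsimk⟩)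
          · rintro (h | hks | ⟨hkq, hsimk⟩)
            · exact Or.inr ((hK1 k).2 (Or.inr ((hK k).2 (Or.inl h))))
            · exact Or.inr ((hK1 k).2 (Or.inl hks))
            · rcases (hmemqt k).1 hkq with hkq | hkt
              · exact Or.inr ((hK1 k).2 (Or.inr ((hK k).2 (Or.inr (Or.inr ⟨hkq, hsimk⟩)))))
              · exact Or.inl hkt
        · intro k v
          rw [hM2 k v]
          constructor
          · rintro (⟨hkt, hv⟩ | ⟨hknt, hXk⟩)
            · rcases hv with hvs | hXt
              · exact Or.inr (Or.inr ⟨hvs, (hmemqt k).2 (Or.inr hkt), by rw [hkt]; exact hsim⟩)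
              · rcases (hM1 t v).1 hXt with ⟨hts', -⟩ | ⟨-, hYt⟩
                · exact absurd hts' hts
                · rcases (hM t v).1 hYt with hMold | ⟨hts', -, -⟩ | ⟨hvs, htq, -⟩
                  · exact Or.inl (show MOld ws S k v by rw [hkt]; exact hMold)
                  · exact absurd hts' hts
                  · exact Or.inr (Or.inr ⟨hvs, (hmemqt k).2 (Or.inr hkt), by rw [hkt]; exact hsim⟩)
            · rcases (hM1 k v).1 hXk with ⟨hks, hv⟩ | ⟨hkns, hYk⟩
              · rcases hv with hvt | hYs
                · exact Or.inr (Or.inl ⟨hks, (hmemqt v).2 (Or.inr hvt), by rw [hvt]; exact hsim⟩)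
                · rcases (hM s v).1 hYs with hMold | ⟨-, hvq, hsimv⟩ | ⟨hvs, -, hsims⟩
                  · exact Or.inl (show MOld ws S k v by rw [hks]; exact hMold)
                  · exact Or.inr (Or.inl ⟨hks, (hmemqt v).2 (Or.inl hvq), hsimv⟩)
                  · exact absurd hsims (by simp [pvSimW_self])
              · rcases (hM k v).1 hYk with hMold | ⟨hks, hvq, hsimv⟩ | ⟨hvs, hkq, hsimk⟩
                · exact Or.inl hMold
                · exact Or.inr (Or.inl ⟨hks, (hmemqt v).2 (Or.inl hvq), hsimv⟩)
                · exact Or.inr (Or.inr ⟨hvs, (hmemqt k).2 (Or.inl hkq), hsimk⟩)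
          · rintro (hMold | ⟨hks, hvqt, hsimv⟩ | ⟨hvs, hkqt, hsimk⟩)
            · by_cases hkt : k = t
              · exact Or.inl ⟨hkt, Or.inr ((hM1 t v).2 (Or.inr ⟨hts,
                  (hM t v).2 (Or.inl (show MOld ws S t v by rw [← hkt]; exact hMold))⟩))⟩
              · refine Or.inr ⟨hkt, ?_⟩
                by_cases hks : k = s
                · exact (hM1 k v).2 (Or.inl ⟨hks, Or.inr ((hM s v).2
                    (Or.inl (show MOld ws S s v by rw [← hks]; exact hMold)))⟩)
                · exact (hM1 k v).2 (Or.inr ⟨hks, (hM k v).2 (Or.inl hMold)⟩)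
            · have hknt : k ≠ t := by
                intro hkt
                exact hts (by rw [← hkt]; exact hks)
              refine Or.inr ⟨hknt, (hM1 k v).2 (Or.inl ⟨hks, ?_⟩)⟩
              rcases (hmemqt v).1 hvqt with hvq | hvt
              · exact Or.inr ((hM s v).2 (Or.inr (Or.inl ⟨rfl, hvq, hsimv⟩)))
              · exact Or.inl hvt
            · rcases (hmemqt k).1 hkqt with hkq | hkt
              · by_cases hkt : k = t
                · exact Or.inl ⟨hkt, Or.inr ((hM1 t v).2 (Or.inr ⟨hts, (hM t v).2
                    (Or.inr (Or.inr ⟨hvs, by rw [← hkt]; exact hkq, by rw [← hkt]; exact hsimk⟩))⟩))⟩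
                · refine Or.inr ⟨hkt, ?_⟩
                  by_cases hks : k = s
                  · have h' : pvSimW s s = true := by rw [hks] at hsimk; exact hsimk
                    rw [pvSimW_self] at h'
                    exact absurd h' (by simp)
                  · exact (hM1 k v).2 (Or.inr ⟨hks, (hM k v).2 (Or.inr (Or.inr ⟨hvs, hkq, hsimk⟩))⟩)
              · exact Or.inl ⟨hkt, Or.inl hvs⟩
      · -- not similar: nothing happens
        have hstep : innerStepA s e t = e := by
          unfold innerStepA
          rw [if_neg (by simp [hts]), hcond, if_neg hsim]
        rw [List.foldl_cons, hstep, List.append_cons q t rest]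
        have hsimf : pvSimW s t ≠ true := hsim
        apply hgoal
        · intro k
          rw [hK k]
          constructor
          · rintro (h | h | ⟨hkq, hsimk⟩)
            · exact Or.inl h
            · exact Or.inr (Or.inl h)
            · exact Or.inr (Or.inr ⟨(hmemqt k).2 (Or.inl hkq), hsimk⟩)
          · rintro (h | h | ⟨hkq, hsimk⟩)
            · exact Or.inl h
            · exact Or.inr (Or.inl h)
            · rcases (hmemqt k).1 hkq with hkq | rfl
              · exact Or.inr (Or.inr ⟨hkq, hsimk⟩)
              · exact absurd hsimk hsimf
        · intro k v
          rw [hM k v]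
          constructor
          · rintro (h | ⟨rfl, hvq, hsimv⟩ | ⟨rfl, hkq, hsimk⟩)
            · exact Or.inl h
            · exact Or.inr (Or.inl ⟨rfl, (hmemqt v).2 (Or.inl hvq), hsimv⟩)
            · exact Or.inr (Or.inr ⟨rfl, (hmemqt k).2 (Or.inl hkq), hsimk⟩)
          · rintro (h | ⟨rfl, hvq, hsimv⟩ | ⟨rfl, hkq, hsimk⟩)
            · exact Or.inl h
            · rcases (hmemqt v).1 hvq with hvq | rfl
              · exact Or.inr (Or.inl ⟨rfl, hvq, hsimv⟩)
              · exact absurd hsimv hsimf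
            · rcases (hmemqt k).1 hkq with hkq | rfl
              · exact Or.inr (Or.inr ⟨rfl, hkq, hsimk⟩)
              · exact absurd hsimk hsimf

theorem buildA_loop (ws : List String) (hpre : Pre_similar_word_groups ws) :
    ∀ (rest : List String) (e : PySem.Dict String (PySem.Set String)) (S : List String),
    (∀ t ∈ rest, t ∈ ws) → (∀ u ∈ S, u ∈ ws) →
    (∀ k, e.contains k = true ↔ KOld ws S k) →
    (∀ k v, PySem.Set.contains (e.getD k PySem.Set.empty) v = true ↔ MOld ws S k v) →
    (∀ u ∈ rest.foldl (fun acc s => if s ∈ acc ∨ acc.any (fun v => pvSimW v s) then acc else acc ++ [s]) S, u ∈ ws) ∧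
    (∀ k, (rest.foldl (buildStepA ws) e).contains k = true ↔
      KOld ws (rest.foldl (fun acc s => if s ∈ acc ∨ acc.any (fun v => pvSimW v s) then acc else acc ++ [s]) S) k) ∧
    (∀ k v, PySem.Set.contains ((rest.foldl (buildStepA ws) e).getD k PySem.Set.empty) v = true ↔
      MOld ws (rest.foldl (fun acc s => if s ∈ acc ∨ acc.any (fun v => pvSimW v s) then acc else acc ++ [s]) S) k v) := by
  intro rest
  induction rest with
  | nil =>
    intro e S _ hSws hK hM
    exact ⟨hSws, hK, hM⟩
  | cons s rest ih =>
    intro e S hrest hSws hK hM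
    have hsws : s ∈ ws := hrest s List.mem_cons_self
    have hrest' : ∀ t ∈ rest, t ∈ ws := fun t ht => hrest t (List.mem_cons_of_mem _ ht)
    simp only [List.foldl_cons]
    by_cases hcs : e.contains s = true
    · have hKs : KOld ws S s := (hK s).1 hcs
      have hcond : s ∈ S ∨ S.any (fun v => pvSimW v s) = true := by
        rcases hKs with h | ⟨-, u, hu, hsim⟩
        · exact Or.inl h
        · exact Or.inr (List.any_eq_true.2 ⟨u, hu, hsim⟩)
      rw [if_pos hcond, show buildStepA ws e s = e from by unfold buildStepA; rw [if_pos hcs]]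
      exact ih e S hrest' hSws hK hM
    · have hKs : ¬ KOld ws S s := by rw [← hK s]; exact fun h => hcs h
      have hns : s ∉ S := fun h => hKs (Or.inl h)
      have hnsim : ¬ ∃ u ∈ S, pvSimW u s = true := fun ⟨u, hu, h⟩ => hKs (Or.inr ⟨hsws, u, hu, h⟩)
      have hcond : ¬ (s ∈ S ∨ S.any (fun v => pvSimW v s) = true) := by
        rintro (h | h)
        · exact hns h
        · rcases List.any_eq_true.1 h with ⟨u, hu, hsim⟩
          exact hnsim ⟨u, hu, hsim⟩
      rw [if_neg hcond, show buildStepA ws e s = ws.foldl (innerStepA s) (e.insert s PySem.Set.empty) from by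
        unfold buildStepA; rw [if_neg hcs]]
      obtain ⟨hK1, hM1⟩ := innerA ws hpre s hsws S [] (e.insert s PySem.Set.empty) (by simp)
        (by
          intro k
          rw [PySem.Dict.contains_insert]
          simp only [Bool.or_eq_true, beq_iff_eq]
          rw [hK k]
          constructor
          · rintro (h | h)
            · exact Or.inr (Or.inl h)
            · exact Or.inl h
          · rintro (h | h | ⟨h, -⟩)
            · exact Or.inr h
            · exact Or.inl h
            · exact absurd h (List.not_mem_nil)
        )
        (by
          intro k v
          rw [PySem.Dict.getD_insert]
          by_cases hks : k = s
          · rw [if_pos hks]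
            constructor
            · intro h
              exact absurd h (by simp [PySem.Set.contains, PySem.Set.empty])
            · rintro (⟨hkws, hvws, hsim, hkS | hvS⟩ | ⟨-, h, -⟩ | ⟨-, h, -⟩)
              · exact absurd (hks ▸ hkS) hns
              · exact absurd ⟨v, hvS, by rw [pvSimW_symm, ← hks]; exact hsim⟩ hnsim
              · exact absurd h (List.not_mem_nil)
              · exact absurd h (List.not_mem_nil)
          · rw [if_neg hks]
            rw [hM k v]
            constructor
            · intro h; exact Or.inl h
            · rintro (h | ⟨hk, -⟩ | ⟨-, h, -⟩)
              · exact h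
              · exact absurd hk hks
              · exact absurd h (List.not_mem_nil)
        )
        ws (fun t ht => ht)
      simp only [List.nil_append] at hK1 hM1
      have hS'ws : ∀ u ∈ S ++ [s], u ∈ ws := by
        intro u hu
        rcases List.mem_append.1 hu with hu | hu
        · exact hSws u hu
        · simp at hu; exact hu ▸ hsws
      refine ih _ (S ++ [s]) hrest' hS'ws ?_ ?_
      · intro k
        rw [hK1 k]
        unfold KOld
        constructor
        · rintro (h | hks | ⟨hkws, hsimk⟩)
          · rcases h with h | ⟨hkws, u, hu, hsim⟩
            · exact Or.inl (List.mem_append.2 (Or.inl h))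
            · exact Or.inr ⟨hkws, u, List.mem_append.2 (Or.inl hu), hsim⟩
          · exact Or.inl (List.mem_append.2 (Or.inr (by simp [hks])))
          · exact Or.inr ⟨hkws, s, List.mem_append.2 (Or.inr (by simp)), hsimk⟩
        · rintro (h | ⟨hkws, u, hu, hsim⟩)
          · rcases List.mem_append.1 h with h | h
            · exact Or.inl (Or.inl h)
            · simp at h; exact Or.inr (Or.inl h)
          · rcases List.mem_append.1 hu with hu | hu
            · exact Or.inl (Or.inr ⟨hkws, u, hu, hsim⟩)
            · simp at hu
              exact Or.inr (Or.inr ⟨hkws, by rw [← hu]; exact hsim⟩)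
      · intro k v
        rw [hM1 k v]
        unfold MOld
        constructor
        · rintro (⟨hkws, hvws, hsim, hkS | hvS⟩ | ⟨hks, hvws, hsimv⟩ | ⟨hvs, hkws, hsimk⟩)
          · exact ⟨hkws, hvws, hsim, Or.inl (List.mem_append.2 (Or.inl hkS))⟩
          · exact ⟨hkws, hvws, hsim, Or.inr (List.mem_append.2 (Or.inl hvS))⟩
          · exact ⟨by rw [hks]; exact hsws, hvws, by rw [hks]; exact hsimv,
              Or.inl (List.mem_append.2 (Or.inr (by simp [hks])))⟩
          · exact ⟨hkws, by rw [hvs]; exact hsws, by rw [hvs]; rw [pvSimW_symm]; exact hsimk,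
              Or.inr (List.mem_append.2 (Or.inr (by simp [hvs])))⟩
        · rintro ⟨hkws, hvws, hsim, hkS | hvS⟩
          · rcases List.mem_append.1 hkS with h | h
            · exact Or.inl ⟨hkws, hvws, hsim, Or.inl h⟩
            · simp at h
              exact Or.inr (Or.inl ⟨h, hvws, by rw [← h]; exact hsim⟩)
          · rcases List.mem_append.1 hvS with h | h
            · exact Or.inl ⟨hkws, hvws, hsim, Or.inr h⟩
            · simp at h
              exact Or.inr (Or.inr ⟨h, hkws, by rw [pvSimW_symm, ← h]; exact hsim⟩)

-- the dict A builds: membership is exactly the edge relation pvEdgeAW between words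
theorem buildA_mem (words : List String) (hpre : Pre_similar_word_groups words) :
    ∀ k v, PySem.Set.contains ((words.foldl (buildStepA words) PySem.Dict.empty).getD k PySem.Set.empty) v = true
      ↔ StW (pvEdgeAW words) words k v := by
  obtain ⟨-, -, hMfin⟩ := buildA_loop words hpre words PySem.Dict.empty [] (fun t ht => ht)
    (by simp)
    (by
      intro k
      rw [PySem.Dict.contains_empty]
      unfold KOld
      simp)
    (by
      intro k v
      rw [PySem.Dict.getD_empty]
      unfold MOld
      simp [PySem.Set.contains, PySem.Set.empty])
  intro k v
  rw [hMfin k v]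
  show MOld words (pvScanW words) k v ↔ StW (pvEdgeAW words) words k v
  unfold MOld StW pvEdgeAW
  simp only [Bool.and_eq_true, Bool.or_eq_true, decide_eq_true_eq]

-- explore lemmas, over an abstract relation R matched by the dict ----------

theorem foldl_inv {α β : Type} (P : α → Prop) (step : α → β → α) :
    ∀ (L : List β) (acc : α), (∀ a v, v ∈ L → P a → P (step a v)) → P acc → P (L.foldl step acc) := by
  intro L
  induction L with
  | nil => intro acc _ h; exact h
  | cons v L ih =>
    intro acc hstep h
    exact ih _ (fun a u hu ha => hstep a u (List.mem_cons_of_mem _ hu) ha)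
      (hstep acc v (List.mem_cons_self) h)

theorem exploreA_mono (d : PySem.Dict String (PySem.Set String)) :
    ∀ (f : Nat) (vis : PySem.Set String) (w x : String),
      PySem.Set.contains vis x = true → PySem.Set.contains (exploreA d f vis w) x = true := by
  intro f
  induction f with
  | zero => intro vis w x h; exact h
  | succ f ih =>
    intro vis w x h
    unfold exploreA
    refine foldl_inv (fun acc => PySem.Set.contains acc x = true) _ _ _ ?_ ?_
    · intro a v _ ha
      by_cases hc : PySem.Set.contains a v = true
      · rw [if_pos hc]; exact ha
      · rw [if_neg hc]; exact ih a v x ha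
    · exact (set_contains_add vis w x).2 (Or.inl h)

theorem exploreA_sound (d : PySem.Dict String (PySem.Set String)) (R : String → String → Prop)
    (hR : ∀ w v, PySem.Set.contains (d.getD w PySem.Set.empty) v = true ↔ R w v) :
    ∀ (f : Nat) (vis : PySem.Set String) (w x : String),
      PySem.Set.contains (exploreA d f vis w) x = true →
      PySem.Set.contains vis x = true ∨ Relation.ReflTransGen R w x := by
  intro f
  induction f with
  | zero => intro vis w x h; exact Or.inl h
  | succ f ih =>
    intro vis w x h
    unfold exploreA at h
    have := foldl_inv (fun acc => ∀ y, PySem.Set.contains acc y = true →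
        PySem.Set.contains vis y = true ∨ Relation.ReflTransGen R w y)
      (fun vis v => if PySem.Set.contains vis v then vis else exploreA d f vis v)
      (d.getD w PySem.Set.empty) (PySem.Set.add vis w) ?_ ?_
    · exact this x h
    · intro a v hv ha y hy
      simp only [] at hy
      by_cases hc : PySem.Set.contains a v = true
      · rw [if_pos hc] at hy; exact ha y hy
      · rw [if_neg hc] at hy
        rcases ih a v y hy with h' | h'
        · exact ha y h'
        · have hRwv : R w v := (hR w v).1 (by rw [set_contains_iff]; exact hv)
          exact Or.inr (Relation.ReflTransGen.head hRwv h')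
    · intro y hy
      rcases (set_contains_add vis w y).1 hy with h' | h'
      · exact Or.inl h'
      · exact Or.inr (h' ▸ Relation.ReflTransGen.refl)

theorem card_lt_helper (ws : List String) (vis acc : PySem.Set String) (w : String)
    (hsub : ∀ x, PySem.Set.contains vis x = true → PySem.Set.contains acc x = true)
    (hw : PySem.Set.contains acc w = true) (hnw : PySem.Set.contains vis w = false)
    (hwws : w ∈ ws) :
    (ws.toFinset.filter (fun x => PySem.Set.contains acc x = false)).card
      < (ws.toFinset.filter (fun x => PySem.Set.contains vis x = false)).card := by
  apply Finset.card_lt_card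
  constructor
  · intro x hx
    rcases Finset.mem_filter.1 hx with ⟨hx1, hx2⟩
    refine Finset.mem_filter.2 ⟨hx1, ?_⟩
    cases hvx : PySem.Set.contains vis x
    · rfl
    · rw [hsub x hvx] at hx2; exact absurd hx2 (by simp)
  · intro hsup
    have hwmem : w ∈ Finset.filter (fun x => PySem.Set.contains vis x = false) ws.toFinset :=
      Finset.mem_filter.2 ⟨List.mem_toFinset.2 hwws, hnw⟩
    have := Finset.mem_filter.1 (hsup hwmem)
    rw [hw] at this
    exact absurd this.2 (by simp)

theorem exploreA_expand (d : PySem.Dict String (PySem.Set String)) (R : String → String → Prop)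
    (hR : ∀ w v, PySem.Set.contains (d.getD w PySem.Set.empty) v = true ↔ R w v)
    (ws : List String) (hdom : ∀ {a b}, R a b → a ∈ ws ∧ b ∈ ws) :
    ∀ (f : Nat) (vis : PySem.Set String) (w : String), w ∈ ws →
      PySem.Set.contains vis w = false →
      (ws.toFinset.filter (fun x => PySem.Set.contains vis x = false)).card < f →
      PySem.Set.contains (exploreA d f vis w) w = true ∧
      (∀ a b, PySem.Set.contains (exploreA d f vis w) a = true →
        PySem.Set.contains vis a = false → R a b →
        PySem.Set.contains (exploreA d f vis w) b = true) := by
  intro f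
  induction f with
  | zero => intro vis w _ _ hf; exact absurd hf (Nat.not_lt_zero _)
  | succ f ih =>
    intro vis w hwws hnw hf
    have hL : ∀ v ∈ d.getD w PySem.Set.empty, R w v := by
      intro v hv
      exact (hR w v).1 ((set_contains_iff _ _).2 hv)
    have main : ∀ (L' : List String) (acc : PySem.Set String),
        (∀ v ∈ L', R w v) →
        (∀ x, PySem.Set.contains (PySem.Set.add vis w) x = true → PySem.Set.contains acc x = true) →
        (∀ a b, PySem.Set.contains acc a = true → PySem.Set.contains vis a = false → a ≠ w →
          R a b → PySem.Set.contains acc b = true) →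
        (∀ x, PySem.Set.contains acc x = true →
          PySem.Set.contains (L'.foldl (fun vis v => if PySem.Set.contains vis v then vis else exploreA d f vis v) acc) x = true) ∧
        (∀ a b, PySem.Set.contains (L'.foldl (fun vis v => if PySem.Set.contains vis v then vis else exploreA d f vis v) acc) a = true →
          PySem.Set.contains vis a = false → a ≠ w → R a b →
          PySem.Set.contains (L'.foldl (fun vis v => if PySem.Set.contains vis v then vis else exploreA d f vis v) acc) b = true) ∧
        (∀ v ∈ L', PySem.Set.contains (L'.foldl (fun vis v => if PySem.Set.contains vis v then vis else exploreA d f vis v) acc) v = true) := by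
      intro L'
      induction L' with
      | nil =>
        intro acc _ hsub hΦ
        exact ⟨fun x hx => hx, fun a b ha hva hne hab => hΦ a b ha hva hne hab, by simp⟩
      | cons v L'' ihL =>
        intro acc hL' hsub hΦ
        simp only [List.foldl_cons]
        by_cases hc : PySem.Set.contains acc v = true
        · rw [if_pos hc]
          obtain ⟨m1, m2, m3⟩ := ihL acc (fun u hu => hL' u (List.mem_cons_of_mem _ hu)) hsub hΦ
          refine ⟨m1, m2, ?_⟩
          intro u hu
          rcases List.mem_cons.1 hu with rfl | hu
          · exact m1 u hc
          · exact m3 u hu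
        · rw [if_neg hc]
          have hRwv : R w v := hL' v (List.mem_cons_self)
          have hvws : v ∈ ws := (hdom hRwv).2
          have haccw : PySem.Set.contains acc w = true :=
            hsub w ((set_contains_add vis w w).2 (Or.inr rfl))
          have hvissub : ∀ x, PySem.Set.contains vis x = true → PySem.Set.contains acc x = true := by
            intro x hx
            exact hsub x ((set_contains_add vis w x).2 (Or.inl hx))
          have hcard : (ws.toFinset.filter (fun x => PySem.Set.contains acc x = false)).card < f := by
            have h1 := card_lt_helper ws vis acc w hvissub haccw hnw hwws
            omega
          obtain ⟨hvU', hΦU'⟩ := ih acc v hvws (by cases h : PySem.Set.contains acc v; rfl; exact absurd h hc) hcard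
          have hmono : ∀ x, PySem.Set.contains acc x = true → PySem.Set.contains (exploreA d f acc v) x = true :=
            fun x hx => exploreA_mono d f acc v x hx
          have hΦ' : ∀ a b, PySem.Set.contains (exploreA d f acc v) a = true →
              PySem.Set.contains vis a = false → a ≠ w → R a b →
              PySem.Set.contains (exploreA d f acc v) b = true := by
            intro a b ha hva hne hab
            by_cases hca : PySem.Set.contains acc a = true
            · exact hmono b (hΦ a b hca hva hne hab)
            · exact hΦU' a b ha (by cases h : PySem.Set.contains acc a; rfl; exact absurd h hca) hab
          obtain ⟨m1, m2, m3⟩ := ihL (exploreA d f acc v)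
            (fun u hu => hL' u (List.mem_cons_of_mem _ hu))
            (fun x hx => hmono x (hsub x hx)) hΦ'
          refine ⟨fun x hx => m1 x (hmono x hx), m2, ?_⟩
          intro u hu
          rcases List.mem_cons.1 hu with rfl | hu
          · exact m1 u hvU'
          · exact m3 u hu
    obtain ⟨m1, m2, m3⟩ := main (d.getD w PySem.Set.empty) (PySem.Set.add vis w) hL
      (fun x hx => hx)
      (by
        intro a b ha hva hne _
        rcases (set_contains_add vis w a).1 ha with h' | h'
        · rw [hva] at h'; exact absurd h' (by simp)
        · exact absurd h' hne)
    have hwU : PySem.Set.contains (exploreA d (f+1) vis w) w = true := by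
      unfold exploreA
      exact m1 w ((set_contains_add vis w w).2 (Or.inr rfl))
    refine ⟨hwU, ?_⟩
    intro a b ha hva hab
    by_cases hne : a = w
    · subst hne
      have hbL : b ∈ d.getD a PySem.Set.empty := (set_contains_iff _ _).1 ((hR a b).2 hab)
      unfold exploreA
      exact m3 b hbL
    · unfold exploreA at ha ⊢
      exact m2 a b ha hva hne hab

theorem exploreA_spec (d : PySem.Dict String (PySem.Set String)) (R : String → String → Prop)
    (hR : ∀ w v, PySem.Set.contains (d.getD w PySem.Set.empty) v = true ↔ R w v)
    (ws : List String) (hdom : ∀ {a b}, R a b → a ∈ ws ∧ b ∈ ws)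
    (f : Nat) (vis : PySem.Set String) (w : String)
    (hclosed : ∀ a b, PySem.Set.contains vis a = true → R a b → PySem.Set.contains vis b = true)
    (hw : w ∈ ws) (hnv : PySem.Set.contains vis w = false)
    (hf : (ws.toFinset.filter (fun x => PySem.Set.contains vis x = false)).card < f) :
    ∀ x, PySem.Set.contains (exploreA d f vis w) x = true ↔
      (PySem.Set.contains vis x = true ∨ Relation.ReflTransGen R w x) := by
  intro x
  constructor
  · exact exploreA_sound d R hR f vis w x
  · intro h
    rcases h with h | h
    · exact exploreA_mono d f vis w x h
    · obtain ⟨hwU, hΦ⟩ := exploreA_expand d R hR ws hdom f vis w hw hnv hf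
      clear hf
      induction h with
      | refl => exact hwU
      | tail hconn hst ihp =>
        rename_i b c
        have hbU := ihp
        by_cases hvb : PySem.Set.contains vis b = true
        · exact exploreA_mono d f vis w c (hclosed b c hvb hst)
        · exact hΦ b c hbU (by cases h : PySem.Set.contains vis b; rfl; exact absurd h hvb) hst

-- A's counting loop --------------------------------------------------------

theorem countA_loop (ws : List String) (d : PySem.Dict String (PySem.Set String))
    (R : String → String → Prop)
    (hR : ∀ w v, PySem.Set.contains (d.getD w PySem.Set.empty) v = true ↔ R w v)
    (hsym : ∀ {a b}, R a b → R b a) (hdom : ∀ {a b}, R a b → a ∈ ws ∧ b ∈ ws) :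
    ∀ (rest seen : List String) (res : Int) (vis : PySem.Set String),
    (∀ x, PySem.Set.contains vis x = true ↔ ∃ t ∈ seen, Relation.ReflTransGen R t x) →
    (∀ s ∈ rest, s ∈ ws) →
    (rest.foldl (fun (acc : Int × PySem.Set String) s =>
        if PySem.Set.contains acc.2 s then acc
        else (acc.1 + 1, exploreA d (ws.length + 1) acc.2 s)) (res, vis)).1
      = res + ((repsList (Relation.ReflTransGen R) seen rest).length : Int) := by
  intro rest
  induction rest with
  | nil =>
    intro seen res vis _ _
    simp [repsList]
  | cons s rest ih =>
    intro seen res vis hvis hrest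
    have hsws : s ∈ ws := hrest s List.mem_cons_self
    have hrest' : ∀ u ∈ rest, u ∈ ws := fun u hu => hrest u (List.mem_cons_of_mem _ hu)
    simp only [List.foldl_cons]
    by_cases hc : PySem.Set.contains vis s = true
    · rw [if_pos hc]
      have hex : ∃ t ∈ seen, Relation.ReflTransGen R t s := (hvis s).1 hc
      have hreps : repsList (Relation.ReflTransGen R) seen (s :: rest)
          = repsList (Relation.ReflTransGen R) (seen ++ [s]) rest := by
        simp only [repsList, if_pos hex]
      rw [hreps]
      refine ih (seen ++ [s]) res vis ?_ hrest'
      intro x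
      rw [hvis x]
      constructor
      · rintro ⟨t, ht, hconn⟩
        exact ⟨t, List.mem_append.2 (Or.inl ht), hconn⟩
      · rintro ⟨t, ht, hconn⟩
        rcases List.mem_append.1 ht with ht | ht
        · exact ⟨t, ht, hconn⟩
        · simp at ht
          rcases hex with ⟨u, hu, huconn⟩
          exact ⟨u, hu, huconn.trans (ht ▸ hconn)⟩
    · rw [if_neg hc]
      have hnex : ¬ ∃ t ∈ seen, Relation.ReflTransGen R t s :=
        fun hex => hc ((hvis s).2 hex)
      have hreps : repsList (Relation.ReflTransGen R) seen (s :: rest)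
          = s :: repsList (Relation.ReflTransGen R) (seen ++ [s]) rest := by
        simp only [repsList, if_neg hnex]
      rw [hreps]
      have hnvs : PySem.Set.contains vis s = false := by
        cases h : PySem.Set.contains vis s
        · rfl
        · exact absurd h hc
      have hclosed : ∀ a b, PySem.Set.contains vis a = true → R a b →
          PySem.Set.contains vis b = true := by
        intro a b ha hab
        rcases (hvis a).1 ha with ⟨t, ht, hconn⟩
        exact (hvis b).2 ⟨t, ht, hconn.tail hab⟩
      have hf : (ws.toFinset.filter (fun x => PySem.Set.contains vis x = false)).card < ws.length + 1 := by
        have h1 := Finset.card_filter_le ws.toFinset (fun x => PySem.Set.contains vis x = false)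
        have h2 := ws.toFinset_card_le
        omega
      have hspec := exploreA_spec d R hR ws hdom (ws.length + 1) vis s hclosed hsws hnvs hf
      have ihres := ih (seen ++ [s]) (res + 1) (exploreA d (ws.length + 1) vis s) ?_ hrest'
      · rw [ihres]
        simp only [List.length_cons]
        push_cast
        ring
      · intro x
        rw [hspec x]
        constructor
        · rintro (h | h)
          · rcases (hvis x).1 h with ⟨t, ht, hconn⟩
            exact ⟨t, List.mem_append.2 (Or.inl ht), hconn⟩
          · exact ⟨s, List.mem_append.2 (Or.inr (by simp)), h⟩
        · rintro ⟨t, ht, hconn⟩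
          rcases List.mem_append.1 ht with ht | ht
          · exact Or.inl ((hvis x).2 ⟨t, ht, hconn⟩)
          · simp at ht
            exact Or.inr (ht ▸ hconn)

theorem A_eq_reps (words : List String) (hpre : Pre_similar_word_groups words) :
    similar_word_groups words
      = ((repsList (ConnW (pvEdgeAW words) words) [] words).length : Int) := by
  have hEsym : ∀ x y, pvEdgeAW words x y = pvEdgeAW words y x := by
    intro x y
    unfold pvEdgeAW
    rw [pvSimW_symm]
    congr 1
    rw [decide_eq_decide]
    exact Or.comm
  have hmain := countA_loop words (words.foldl (buildStepA words) PySem.Dict.empty)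
    (StW (pvEdgeAW words) words) (buildA_mem words hpre)
    (fun h => StW_symm (pvEdgeAW words) hEsym words h)
    (fun h => ⟨h.1, h.2.1⟩)
    words [] 0 PySem.Set.empty
    (by
      intro x
      constructor
      · intro h; exact absurd h (by simp [PySem.Set.contains, PySem.Set.empty])
      · rintro ⟨t, ht, -⟩; exact absurd ht (List.not_mem_nil))
    (fun s hs => hs)
  show (words.foldl (fun (acc : Int × PySem.Set String) s =>
      if PySem.Set.contains acc.2 s then acc
      else (acc.1 + 1, exploreA (words.foldl (buildStepA words) PySem.Dict.empty) (words.length + 1) acc.2 s))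
    (0, PySem.Set.empty)).1 = _
  rw [hmain]
  unfold ConnW
  omega

-- B's merging loop ---------------------------------------------------------

-- B-side: the merge step in closed form
def pcB (s : String) (c : List String) : Bool := c.any (fun t => pvSimW s t)

theorem mstep_eq (s : String) :
    ∀ (comps : List (List String)), (∀ c ∈ comps, ∀ t ∈ c, simB s t = pvSimW s t) →
    ∀ (m : List String) (r : List (List String)),
      comps.foldl (fun (mr : List String × List (List String)) comp =>
          if hitB s comp then (mr.1 ++ comp, mr.2) else (mr.1, mr.2 ++ [comp]))
        (m, r)
      = (m ++ (comps.filter (pcB s)).flatten, r ++ comps.filter (fun c => !(pcB s c))) := by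
  intro comps
  induction comps with
  | nil => intro _ m r; simp
  | cons c comps ih0 =>
    intro hok m r
    have ih := ih0 (fun c' hc' t ht => hok c' (List.mem_cons_of_mem _ hc') t ht)
    have hany : hitB s c = pcB s c := by
      rw [hitB_any]
      unfold pcB
      exact PySem.List.any_congr_mem (fun t ht => hok c List.mem_cons_self t ht)
    simp only [List.foldl_cons]
    by_cases hpc : pcB s c = true
    · rw [if_pos (by rw [hany]; exact hpc), ih]
      simp [List.filter_cons, hpc]
    · have hpc' : pcB s c = false := by cases h : pcB s c; rfl; exact absurd h hpc
      rw [if_neg (by rw [hany, hpc']; simp), ih]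
      simp [List.filter_cons, hpc']

-- the B invariant: comps is the component partition of the processed prefix
def BInv (p : List String) (comps : List (List String)) : Prop :=
  comps.flatten.Perm p ∧
  (∀ c ∈ comps, c ≠ []) ∧
  (∀ c ∈ comps, ∀ x ∈ c, ∀ y ∈ c, ConnW pvSimW p x y) ∧
  comps.Pairwise (fun c c' => ∀ x ∈ c, ∀ y ∈ c', ¬ ConnW pvSimW p x y)

theorem connW_mono_verts (E : String → String → Bool) (p p' : List String)
    (h : ∀ a, a ∈ p → a ∈ p') {x y : String} (hc : ConnW E p x y) : ConnW E p' x y :=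
  Relation.ReflTransGen.mono (fun a b hab => ⟨h a hab.1, h b hab.2.1, hab.2.2⟩) hc

theorem pairwise_not_conn_forall (p : List String) (comps : List (List String))
    (hpw : comps.Pairwise (fun c c' => ∀ x ∈ c, ∀ y ∈ c', ¬ ConnW pvSimW p x y))
    {c c' : List String} (hc : c ∈ comps) (hc' : c' ∈ comps) (hne : c ≠ c')
    {x y : String} (hx : x ∈ c) (hy : y ∈ c') : ¬ ConnW pvSimW p x y := by
  have hsymrel : Symmetric (fun c c' : List String => ∀ x ∈ c, ∀ y ∈ c', ¬ ConnW pvSimW p x y) := by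
    intro a b hab x hx y hy hconn
    exact hab y hy x hx (ConnW_symm pvSimW pvSimW_symm p hconn)
  exact List.Pairwise.forall hsymrel hpw hc hc' hne x hx y hy

-- path confinement: from a member of an untouched component, paths in the extended graph
-- stay in the old graph and never reach s
theorem conf_lemma (p : List String) (comps : List (List String)) (s : String)
    (hinv : BInv p comps) (hns : s ∉ p)
    {c : List String} (hc : c ∈ comps) (hcu : pcB s c = false)
    {x : String} (hx : x ∈ c) :
    ∀ z, ConnW pvSimW (p ++ [s]) x z → ConnW pvSimW p x z ∧ z ≠ s := by
  obtain ⟨hperm, hne, hintra, hpw⟩ := hinv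
  intro z hz
  induction hz with
  | refl =>
    refine ⟨Relation.ReflTransGen.refl, ?_⟩
    intro hxs
    have hxp : x ∈ p := hperm.mem_iff.1 (List.mem_flatten.2 ⟨c, hc, hx⟩)
    exact hns (hxs ▸ hxp)
  | tail hconn hst ih =>
    rename_i a z'
    obtain ⟨hxa, hans⟩ := ih
    have hap : a ∈ p := by
      rcases hxa.cases_tail with h | ⟨b, -, hstb⟩
      · rw [h]; exact hperm.mem_iff.1 (List.mem_flatten.2 ⟨c, hc, hx⟩)
      · exact hstb.2.1
    by_cases hzs : z' = s
    · -- the path would step into s: then a is similar to s, so c would be touched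
      exfalso
      obtain ⟨ca, hca, haca⟩ := List.mem_flatten.1 (hperm.mem_iff.2 hap)
      have hsim : pvSimW a s = true := by rw [← hzs]; exact hst.2.2
      have hceq : ca = c := by
        by_contra hnec
        exact pairwise_not_conn_forall p comps hpw hc hca (fun h => hnec (h ▸ rfl)) hx haca hxa
      have : pcB s c = true := by
        unfold pcB
        refine List.any_eq_true.2 ⟨a, hceq ▸ haca, ?_⟩
        rw [pvSimW_symm]; exact hsim
      rw [hcu] at this
      exact absurd this (by simp)
    · have hzp : z' ∈ p := by
        rcases List.mem_append.1 hst.2.1 with h | h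
        · exact h
        · simp at h; exact absurd h hzs
      exact ⟨hxa.tail ⟨hap, hzp, hst.2.2⟩, hzs⟩

theorem BInv_step (p : List String) (comps : List (List String)) (s : String)
    (hinv : BInv p comps) (hns : s ∉ p) :
    BInv (p ++ [s])
      ((comps.filter (fun c => !(pcB s c))) ++ [s :: (comps.filter (pcB s)).flatten]) := by
  obtain ⟨hperm, hne, hintra, hpw⟩ := hinv
  have hsubp : ∀ a, a ∈ p → a ∈ p ++ [s] := fun a ha => List.mem_append.2 (Or.inl ha)
  have hmemflat : ∀ {x cx}, cx ∈ comps → x ∈ cx → x ∈ p :=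
    fun {x cx} hcx hx => hperm.mem_iff.1 (List.mem_flatten.2 ⟨cx, hcx, hx⟩)
  -- every member of the merged component connects to s in the extended graph
  have hconns : ∀ x, x ∈ (s :: (comps.filter (pcB s)).flatten) → ConnW pvSimW (p ++ [s]) x s := by
    intro x hx
    rcases List.mem_cons.1 hx with rfl | hx
    · exact Relation.ReflTransGen.refl
    · obtain ⟨ct, hct, hxct⟩ := List.mem_flatten.1 hx
      obtain ⟨hctc, hpct⟩ := List.mem_filter.1 hct
      obtain ⟨t, htc, hsim⟩ := List.any_eq_true.1 hpct
      have hconn : ConnW pvSimW p x t := hintra ct hctc x hxct t htc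
      refine (connW_mono_verts pvSimW p (p ++ [s]) hsubp hconn).tail ?_
      exact ⟨hsubp t (hmemflat hctc htc), List.mem_append.2 (Or.inr (by simp)),
        by rw [pvSimW_symm]; exact hsim⟩
  refine ⟨?_, ?_, ?_, ?_⟩
  · -- permutation
    have h1 : ((comps.filter (fun c => !(pcB s c))) ++ [s :: (comps.filter (pcB s)).flatten]).flatten
        = (comps.filter (fun c => !(pcB s c))).flatten ++ (s :: (comps.filter (pcB s)).flatten) := by
      simp
    rw [h1]
    refine List.Perm.trans List.perm_middle ?_
    refine List.Perm.trans ?_ (List.perm_append_singleton s p).symm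
    refine List.Perm.cons s ?_
    rw [← List.flatten_append]
    refine List.Perm.trans (List.Perm.flatten ?_) hperm
    refine List.Perm.trans (List.perm_append_comm) ?_
    exact List.filter_append_perm (pcB s) comps
  · -- nonempty
    intro c hc
    rcases List.mem_append.1 hc with hc | hc
    · exact hne c (List.mem_filter.1 hc).1
    · simp at hc
      rw [hc]
      simp
  · -- internal connectivity
    intro c hc x hx y hy
    rcases List.mem_append.1 hc with hc | hc
    · exact connW_mono_verts pvSimW p _ hsubp
        (hintra c (List.mem_filter.1 hc).1 x hx y hy)
    · simp only [List.mem_singleton] at hc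
      subst hc
      exact (hconns x hx).trans (ConnW_symm pvSimW pvSimW_symm _ (hconns y hy))
  · -- separation
    rw [List.pairwise_append]
    refine ⟨?_, by simp, ?_⟩
    · refine List.Pairwise.imp_of_mem ?_ (hpw.sublist List.filter_sublist)
      intro c c' hcm hcm' hold x hx y hy hconn
      obtain ⟨hcc, hcu⟩ := List.mem_filter.1 hcm
      have hcuf : pcB s c = false := by
        cases h : pcB s c
        · rfl
        · rw [h] at hcu; exact absurd hcu (by simp)
      obtain ⟨hconnp, -⟩ := conf_lemma p comps s ⟨hperm, hne, hintra, hpw⟩ hns hcc hcuf hx y hconn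
      exact hold x hx y hy hconnp
    · intro c hc m hm x hx y hy hconn
      simp only [List.mem_singleton] at hm
      subst hm
      obtain ⟨hcc, hcu⟩ := List.mem_filter.1 hc
      have hcuf : pcB s c = false := by
        cases h : pcB s c
        · rfl
        · rw [h] at hcu; exact absurd hcu (by simp)
      obtain ⟨hconnp, hys⟩ := conf_lemma p comps s ⟨hperm, hne, hintra, hpw⟩ hns hcc hcuf hx y hconn
      rcases List.mem_cons.1 hy with rfl | hy
      · exact hys rfl
      · obtain ⟨ct, hct, hyct⟩ := List.mem_flatten.1 hy
        obtain ⟨hctc, hpct⟩ := List.mem_filter.1 hct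
        have hnec : c ≠ ct := by
          intro h
          rw [← h] at hpct
          rw [hcuf] at hpct
          exact absurd hpct (by simp)
        exact pairwise_not_conn_forall p comps hpw hcc hctc hnec hx hyct hconnp

theorem B_loop :
    ∀ (rest p : List String) (comps : List (List String)),
    (p ++ rest).Nodup →
    (∀ x ∈ p ++ rest, ∀ y ∈ p ++ rest, simB x y = pvSimW x y) → BInv p comps →
    BInv (p ++ rest)
      (rest.foldl (fun (comps : List (List String)) s =>
        let mr := comps.foldl
          (fun (mr : List String × List (List String)) comp =>
            if hitB s comp then (mr.1 ++ comp, mr.2) else (mr.1, mr.2 ++ [comp]))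
          ([s], [])
        mr.2 ++ [mr.1]) comps) := by
  intro rest
  induction rest with
  | nil =>
    intro p comps _ _ hinv
    simpa using hinv
  | cons s rest ih =>
    intro p comps hnd hok hinv
    have hns : s ∉ p := by
      have h := hnd
      rw [List.nodup_append] at h
      exact fun hsp => h.2.2 s hsp s (List.mem_cons_self) rfl
    have hco : ∀ c ∈ comps, ∀ t ∈ c, simB s t = pvSimW s t := by
      intro c hc t ht
      have htp : t ∈ p := hinv.1.mem_iff.1 (List.mem_flatten.2 ⟨c, hc, ht⟩)
      exact hok s (List.mem_append.2 (Or.inr List.mem_cons_self)) t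
        (List.mem_append.2 (Or.inl htp))
    simp only [List.foldl_cons]
    have hacc : (comps.foldl
          (fun (mr : List String × List (List String)) comp =>
            if hitB s comp then (mr.1 ++ comp, mr.2) else (mr.1, mr.2 ++ [comp]))
          ([s], [])).2 ++ [(comps.foldl
          (fun (mr : List String × List (List String)) comp =>
            if hitB s comp then (mr.1 ++ comp, mr.2) else (mr.1, mr.2 ++ [comp]))
          ([s], [])).1]
        = (comps.filter (fun c => !(pcB s c))) ++ [s :: (comps.filter (pcB s)).flatten] := by
      rw [mstep_eq s comps hco]
      simp
    have hok' : ∀ x ∈ (p ++ [s]) ++ rest, ∀ y ∈ (p ++ [s]) ++ rest, simB x y = pvSimW x y := by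
      intro x hx y hy
      refine hok x ?_ y ?_
      · rcases List.mem_append.1 hx with hx | hx
        · rcases List.mem_append.1 hx with hx | hx
          · exact List.mem_append.2 (Or.inl hx)
          · simp at hx; exact List.mem_append.2 (Or.inr (hx ▸ List.mem_cons_self))
        · exact List.mem_append.2 (Or.inr (List.mem_cons_of_mem _ hx))
      · rcases List.mem_append.1 hy with hy | hy
        · rcases List.mem_append.1 hy with hy | hy
          · exact List.mem_append.2 (Or.inl hy)
          · simp at hy; exact List.mem_append.2 (Or.inr (hy ▸ List.mem_cons_self))
        · exact List.mem_append.2 (Or.inr (List.mem_cons_of_mem _ hy))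
    have hres := ih (p ++ [s])
      ((comps.filter (fun c => !(pcB s c))) ++ [s :: (comps.filter (pcB s)).flatten])
      (by rw [← List.append_cons]; exact hnd)
      (by
        intro x hx y hy
        refine hok' x ?_ y ?_ <;> rw [List.append_assoc] at * <;> assumption)
      (BInv_step p comps s hinv hns)
    rw [show p ++ s :: rest = (p ++ [s]) ++ rest from by simp]
    show BInv ((p ++ [s]) ++ rest) (rest.foldl _ ((comps.foldl
          (fun (mr : List String × List (List String)) comp =>
            if hitB s comp then (mr.1 ++ comp, mr.2) else (mr.1, mr.2 ++ [comp]))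
          ([s], [])).2 ++ [(comps.foldl
          (fun (mr : List String × List (List String)) comp =>
            if hitB s comp then (mr.1 ++ comp, mr.2) else (mr.1, mr.2 ++ [comp]))
          ([s], [])).1]))
    rw [hacc]
    exact hres

theorem reps_seen_ext (C : String → String → Prop) :
    ∀ (l seen₁ seen₂ : List String), (∀ x, x ∈ seen₁ ↔ x ∈ seen₂) →
      repsList C seen₁ l = repsList C seen₂ l := by
  intro l
  induction l with
  | nil => intro _ _ _; rfl
  | cons s l ih =>
    intro seen₁ seen₂ h
    have hmem : ∀ x, x ∈ seen₁ ++ [s] ↔ x ∈ seen₂ ++ [s] := by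
      intro x
      simp only [List.mem_append]
      rw [h x]
    by_cases hex : ∃ t ∈ seen₁, C t s
    · have hex' : ∃ t ∈ seen₂, C t s := by
        rcases hex with ⟨t, ht, hC⟩; exact ⟨t, (h t).1 ht, hC⟩
      simp only [repsList, if_pos hex, if_pos hex', ih _ _ hmem]
    · have hex' : ¬ ∃ t ∈ seen₂, C t s := by
        rintro ⟨t, ht, hC⟩; exact hex ⟨t, (h t).2 ht, hC⟩
      simp only [repsList, if_neg hex, if_neg hex', ih _ _ hmem]

theorem reps_props (C : String → String → Prop) :
    ∀ (l seen : List String),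
      (∀ a ∈ repsList C seen l, a ∈ l) ∧
      (∀ a ∈ repsList C seen l, ∀ t ∈ seen, ¬ C t a) ∧
      (repsList C seen l).Pairwise (fun a b => ¬ C a b) := by
  intro l
  induction l with
  | nil => intro seen; exact ⟨by simp [repsList], by simp [repsList], by simp [repsList]⟩
  | cons s l ih =>
    intro seen
    by_cases hex : ∃ t ∈ seen, C t s
    · obtain ⟨h1, h2, h3⟩ := ih (seen ++ [s])
      rw [show repsList C seen (s :: l) = repsList C (seen ++ [s]) l from by
        simp only [repsList, if_pos hex]]
      exact ⟨fun a ha => List.mem_cons_of_mem _ (h1 a ha),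
        fun a ha t ht => h2 a ha t (List.mem_append.2 (Or.inl ht)), h3⟩
    · obtain ⟨h1, h2, h3⟩ := ih (seen ++ [s])
      rw [show repsList C seen (s :: l) = s :: repsList C (seen ++ [s]) l from by
        simp only [repsList, if_neg hex]]
      refine ⟨?_, ?_, ?_⟩
      · intro a ha
        rcases List.mem_cons.1 ha with rfl | ha
        · exact List.mem_cons_self
        · exact List.mem_cons_of_mem _ (h1 a ha)
      · intro a ha t ht
        rcases List.mem_cons.1 ha with rfl | ha
        · exact fun hC => hex ⟨t, ht, hC⟩
        · exact h2 a ha t (List.mem_append.2 (Or.inl ht))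
      · refine List.Pairwise.cons ?_ h3
        intro b hb
        exact h2 b hb s (List.mem_append.2 (Or.inr (by simp)))

theorem reps_complete (C : String → String → Prop) (hrefl : ∀ x, C x x)
    (htrans : ∀ {a b c}, C a b → C b c → C a c) :
    ∀ (l seen R0 : List String), (∀ t ∈ seen, ∃ rp, rp ∈ R0 ∧ C rp t) →
      ∀ x ∈ l, ∃ rp, (rp ∈ R0 ∨ rp ∈ repsList C seen l) ∧ C rp x := by
  intro l
  induction l with
  | nil => intro seen R0 _ x hx; exact absurd hx (List.not_mem_nil)
  | cons s l ih =>
    intro seen R0 hseen x hx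
    by_cases hex : ∃ t ∈ seen, C t s
    · rw [show repsList C seen (s :: l) = repsList C (seen ++ [s]) l from by
        simp only [repsList, if_pos hex]]
      obtain ⟨t, ht, hCts⟩ := hex
      obtain ⟨rp0, hrp0, hCrp0⟩ := hseen t ht
      have hseen' : ∀ u ∈ seen ++ [s], ∃ rp, rp ∈ R0 ∧ C rp u := by
        intro u hu
        rcases List.mem_append.1 hu with hu | hu
        · exact hseen u hu
        · simp at hu
          exact ⟨rp0, hrp0, htrans hCrp0 (hu ▸ hCts)⟩
      rcases List.mem_cons.1 hx with hxs | hx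
      · exact ⟨rp0, Or.inl hrp0, by rw [hxs]; exact htrans hCrp0 hCts⟩
      · exact ih (seen ++ [s]) R0 hseen' x hx
    · rw [show repsList C seen (s :: l) = s :: repsList C (seen ++ [s]) l from by
        simp only [repsList, if_neg hex]]
      have hseen' : ∀ u ∈ seen ++ [s], ∃ rp, rp ∈ R0 ++ [s] ∧ C rp u := by
        intro u hu
        rcases List.mem_append.1 hu with hu | hu
        · obtain ⟨rp, hrp, hC⟩ := hseen u hu
          exact ⟨rp, List.mem_append.2 (Or.inl hrp), hC⟩
        · simp at hu
          exact ⟨s, List.mem_append.2 (Or.inr (by simp)), by rw [hu]; exact hrefl s⟩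
      rcases List.mem_cons.1 hx with hxs | hx
      · exact ⟨s, Or.inr List.mem_cons_self, by rw [hxs]; exact hrefl s⟩
      · obtain ⟨rp, hrp, hC⟩ := ih (seen ++ [s]) (R0 ++ [s]) hseen' x hx
        rcases hrp with hrp | hrp
        · rcases List.mem_append.1 hrp with hrp | hrp
          · exact ⟨rp, Or.inl hrp, hC⟩
          · simp at hrp
            exact ⟨rp, Or.inr (by rw [hrp]; exact List.mem_cons_self), hC⟩
        · exact ⟨rp, Or.inr (List.mem_cons_of_mem _ hrp), hC⟩

theorem foldl_add_prefix : ∀ (l S : List String), S <+: l.foldl PySem.Set.add S := by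
  intro l
  induction l with
  | nil => intro S; exact List.prefix_refl S
  | cons x l ih =>
    intro S
    rw [List.foldl_cons]
    refine List.IsPrefix.trans ?_ (ih (PySem.Set.add S x))
    unfold PySem.Set.add
    by_cases h : PySem.Set.contains S x = true
    · rw [if_pos h]
    · rw [if_neg h]; exact List.prefix_append S [x]

theorem reps_dedup (C : String → String → Prop) (hrefl : ∀ x, C x x) :
    ∀ (l S seen : List String), (∀ x, x ∈ S ↔ x ∈ seen) →
      repsList C seen ((l.foldl PySem.Set.add S).drop S.length) = repsList C seen l := by
  intro l
  induction l with
  | nil =>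
    intro S seen _
    simp [List.drop_length, repsList]
  | cons s l ih =>
    intro S seen h
    rw [List.foldl_cons]
    by_cases hc : PySem.Set.contains S s = true
    · have hadd : PySem.Set.add S s = S := by unfold PySem.Set.add; rw [if_pos hc]
      rw [hadd, ih S seen h]
      have hss : s ∈ seen := (h s).1 (by simpa [PySem.Set.contains, List.contains_iff_mem] using hc)
      have hex : ∃ t ∈ seen, C t s := ⟨s, hss, hrefl s⟩
      rw [show repsList C seen (s :: l) = repsList C (seen ++ [s]) l from by
        simp only [repsList, if_pos hex]]
      exact reps_seen_ext C l seen (seen ++ [s]) (by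
        intro x
        simp only [List.mem_append]
        constructor
        · exact fun hx => Or.inl hx
        · rintro (hx | hx)
          · exact hx
          · simp at hx; exact hx ▸ hss)
    · have hadd : PySem.Set.add S s = S ++ [s] := by unfold PySem.Set.add; rw [if_neg hc]
      rw [hadd]
      obtain ⟨rest', heq⟩ := foldl_add_prefix l (S ++ [s])
      have hdrop1 : (l.foldl PySem.Set.add (S ++ [s])).drop S.length = s :: rest' := by
        rw [← heq, List.append_assoc]
        rw [List.drop_left]
        rfl
      have hdrop2 : (l.foldl PySem.Set.add (S ++ [s])).drop (S ++ [s]).length = rest' := by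
        rw [← heq, List.drop_left]
      rw [hdrop1]
      have hmem' : ∀ x, x ∈ S ++ [s] ↔ x ∈ seen ++ [s] := by
        intro x
        simp only [List.mem_append]
        rw [h x]
      have hrec := (hdrop2 ▸ ih (S ++ [s]) (seen ++ [s]) hmem' :
        repsList C (seen ++ [s]) rest' = repsList C (seen ++ [s]) l)
      have hns : s ∉ seen := fun hx => by
        have : PySem.Set.contains S s = true := by
          simp [PySem.Set.contains, List.contains_iff_mem]
          exact (h s).2 hx
        exact absurd this hc
      by_cases hex : ∃ t ∈ seen, C t s
      · simp only [repsList, if_pos hex]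
        exact hrec
      · simp only [repsList, if_neg hex]
        rw [hrec]

theorem reps_congr (C C' : String → String → Prop)
    (h : ∀ x y, C x y ↔ C' x y) :
    ∀ l seen, repsList C seen l = repsList C' seen l := by
  intro l
  induction l with
  | nil => intro seen; rfl
  | cons s rest ih =>
    intro seen
    by_cases hc : ∃ t ∈ seen, C t s
    · have hc' : ∃ t ∈ seen, C' t s := by
        rcases hc with ⟨t, ht, hC⟩; exact ⟨t, ht, (h t s).1 hC⟩
      simp only [repsList, if_pos hc, if_pos hc', ih]
    · have hc' : ¬ ∃ t ∈ seen, C' t s := by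
        rintro ⟨t, ht, hC⟩; exact hc ⟨t, ht, (h t s).2 hC⟩
      simp only [repsList, if_neg hc, if_neg hc', ih]

theorem reps_length_le (C C' : String → String → Prop)
    (h : ∀ {x y}, C x y → C' x y) :
    ∀ l seen, (repsList C' seen l).length ≤ (repsList C seen l).length := by
  intro l
  induction l with
  | nil => intro seen; exact le_refl _
  | cons s rest ih =>
    intro seen
    by_cases hc : ∃ t ∈ seen, C t s
    · have hc' : ∃ t ∈ seen, C' t s := by
        rcases hc with ⟨t, ht, hC⟩; exact ⟨t, ht, h hC⟩
      simp only [repsList, if_pos hc, if_pos hc', ih]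
    · by_cases hc' : ∃ t ∈ seen, C' t s
      · simp only [repsList, if_neg hc, if_pos hc', List.length_cons]
        exact le_trans (ih _) (Nat.le_succ _)
      · simp only [repsList, if_neg hc, if_neg hc', List.length_cons]
        exact Nat.succ_le_succ (ih _)

theorem partition_count (uniq : List String) (hndu : uniq.Nodup) (comps : List (List String))
    (hinv : BInv uniq comps) :
    comps.length = (repsList (ConnW pvSimW uniq) [] uniq).length := by
  obtain ⟨hperm, hne, hintra, hpw⟩ := hinv
  set C := ConnW pvSimW uniq with hC
  have hCrefl : ∀ x, C x x := fun x => Relation.ReflTransGen.refl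
  have hCsymm : ∀ {a b}, C a b → C b a := fun h => ConnW_symm pvSimW pvSimW_symm uniq h
  have hCtrans : ∀ {a b c}, C a b → C b c → C a c := fun h1 h2 => h1.trans h2
  set R := repsList C [] uniq with hR
  obtain ⟨hRsub, -, hRpw⟩ := reps_props C uniq []
  have hcompl : ∀ x ∈ uniq, ∃ rp ∈ R, C rp x := by
    intro x hx
    obtain ⟨rp, hrp, hCx⟩ := reps_complete C hCrefl hCtrans uniq [] [] (by simp) x hx
    rcases hrp with hrp | hrp
    · exact absurd hrp (List.not_mem_nil)
    · exact ⟨rp, hrp, hCx⟩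
  have hflatnd : comps.flatten.Nodup := hperm.nodup_iff.2 hndu
  have hRnd : R.Nodup := by
    refine List.Pairwise.imp ?_ hRpw
    intro a b hnC heq
    exact hnC (heq ▸ hCrefl a)
  have hone : ∀ c ∈ comps, (c.filter (fun x => decide (x ∈ R))).length = 1 := by
    intro c hc
    have hcnd : c.Nodup := (List.nodup_flatten.1 hflatnd).1 c hc
    obtain ⟨x, hx⟩ := List.exists_mem_of_ne_nil c (hne c hc)
    have hxu : x ∈ uniq := hperm.mem_iff.1 (List.mem_flatten.2 ⟨c, hc, hx⟩)
    obtain ⟨rp, hrpR, hCrpx⟩ := hcompl x hxu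
    obtain ⟨c', hc', hrpc'⟩ := List.mem_flatten.1 (hperm.mem_iff.2 (hRsub rp hrpR))
    have hceq : c' = c := by
      by_contra hnec
      exact pairwise_not_conn_forall uniq comps hpw hc' hc hnec hrpc' hx hCrpx
    have hrpc : rp ∈ c := hceq ▸ hrpc'
    have hrpfil : rp ∈ c.filter (fun x => decide (x ∈ R)) :=
      List.mem_filter.2 ⟨hrpc, by simp [hrpR]⟩
    have huniqmem : ∀ a b, a ∈ c.filter (fun x => decide (x ∈ R)) →
        b ∈ c.filter (fun x => decide (x ∈ R)) → a = b := by
      intro a b ha hb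
      obtain ⟨hac, haR⟩ := List.mem_filter.1 ha
      obtain ⟨hbc, hbR⟩ := List.mem_filter.1 hb
      by_contra hne'
      have hCab : C a b := hintra c hc a hac b hbc
      have hsymrel : Symmetric (fun a b : String => ¬ C a b) := by
        intro u v huv hvu
        exact huv (hCsymm hvu)
      exact List.Pairwise.forall hsymrel hRpw (by simpa using haR) (by simpa using hbR) hne' hCab
    cases hfl : c.filter (fun x => decide (x ∈ R)) with
    | nil => rw [hfl] at hrpfil; exact absurd hrpfil (List.not_mem_nil)
    | cons a tl =>
      cases htl : tl with
      | nil => simp [hfl, htl]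
      | cons b tl' =>
        exfalso
        have hnd' : (c.filter (fun x => decide (x ∈ R))).Nodup := hcnd.filter _
        rw [hfl, htl] at hnd'
        have hab : a = b := huniqmem a b (by rw [hfl, htl]; exact List.mem_cons_self)
          (by rw [hfl, htl]; exact List.mem_cons_of_mem _ List.mem_cons_self)
        rw [List.nodup_cons] at hnd'
        exact hnd'.1 (hab ▸ List.mem_cons_self)
  have hq : ∀ (L : List (List String)), (L.flatten.filter (fun x => decide (x ∈ R)))
      = (L.map (fun c => c.filter (fun x => decide (x ∈ R)))).flatten := by
    intro L
    induction L with
    | nil => rfl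
    | cons c L ihL => simp [List.filter_append, ihL]
  have hlen1 : R.length = (uniq.filter (fun x => decide (x ∈ R))).length := by
    have hfilnd : (uniq.filter (fun x => decide (x ∈ R))).Nodup :=
      (hperm.nodup_iff.1 hflatnd).filter _
    have hts : R.toFinset = (uniq.filter (fun x => decide (x ∈ R))).toFinset := by
      ext a
      simp only [List.mem_toFinset, List.mem_filter, decide_eq_true_eq]
      exact ⟨fun ha => ⟨hRsub a ha, ha⟩, fun h => h.2⟩
    rw [← List.toFinset_card_of_nodup hRnd, ← List.toFinset_card_of_nodup hfilnd, hts]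
  rw [hlen1]
  have hlen2 : (uniq.filter (fun x => decide (x ∈ R))).length
      = (comps.flatten.filter (fun x => decide (x ∈ R))).length :=
    ((List.Perm.filter _ hperm).length_eq).symm
  rw [hlen2, hq, List.length_flatten, List.map_map]
  have : comps.map (List.length ∘ fun c => c.filter (fun x => decide (x ∈ R)))
      = comps.map (fun _ => 1) := by
    refine List.map_congr_left ?_
    intro c hc
    exact hone c hc
  rw [this]
  simp

theorem B_eq_reps (words : List String) (hpre : Pre_similar_word_groups words) :
    similar_word_groups_alt words
      = ((repsList (ConnW pvSimW words) [] words).length : Int) := by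
  unfold similar_word_groups_alt
  rw [dedupB_eq]
  have hinv0 : BInv [] [] := by
    refine ⟨by simp, by simp, by simp, List.Pairwise.nil⟩
  have hnd : (([] : List String) ++ PySem.List.dedup words).Nodup := by
    simpa using PySem.Set.nodup_ofList words
  have hmemw : ∀ x ∈ PySem.List.dedup words, x ∈ words := by
    intro x hx
    have := PySem.Set.mem_ofList (xs := words) (y := x)
    simp only [PySem.List.dedup_eq_ofList] at hx
    exact this.1 hx
  have hok : ∀ x ∈ ([] : List String) ++ PySem.List.dedup words,
      ∀ y ∈ ([] : List String) ++ PySem.List.dedup words, simB x y = pvSimW x y := by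
    intro x hx y hy
    simp only [List.nil_append] at hx hy
    exact simB_eq_pvSimW x y (hpre x (hmemw x hx) y (hmemw y hy))
  have hloop := B_loop (PySem.List.dedup words) [] [] hnd hok hinv0
  simp only [List.nil_append] at hloop
  have hcount := partition_count (PySem.List.dedup words) (by simpa using PySem.Set.nodup_ofList words) _ hloop
  have hiff : ∀ x y, ConnW pvSimW (PySem.List.dedup words) x y ↔ ConnW pvSimW words x y := by
    intro x y
    constructor
    · exact connW_mono_verts pvSimW _ _ (fun a ha => by
        have := PySem.Set.mem_ofList (xs := words) (y := a)
        simp only [PySem.List.dedup_eq_ofList] at ha ⊢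
        exact this.1 ha)
    · exact connW_mono_verts pvSimW _ _ (fun a ha => by
        have := PySem.Set.mem_ofList (xs := words) (y := a)
        simp only [PySem.List.dedup_eq_ofList]
        exact this.2 ha)
  have hcongr := reps_congr (ConnW pvSimW (PySem.List.dedup words)) (ConnW pvSimW words)
    hiff (PySem.List.dedup words) []
  have hdedup := reps_dedup (ConnW pvSimW words) (fun x => Relation.ReflTransGen.refl)
    words [] [] (by simp)
  have hlen : ((PySem.List.dedup words).foldl
      (fun (comps : List (List String)) s =>
        let mr := comps.foldl
          (fun (mr : List String × List (List String)) comp =>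
            if hitB s comp then (mr.1 ++ comp, mr.2) else (mr.1, mr.2 ++ [comp]))
          ([s], [])
        mr.2 ++ [mr.1]) []).length
      = (repsList (ConnW pvSimW words) [] words).length := by
    rw [hcount, hcongr]
    have hofl : PySem.List.dedup words = (words.foldl PySem.Set.add []).drop ([] : List String).length := by
      simp [PySem.List.dedup, PySem.Set.ofList, PySem.Set.empty]
    rw [hofl, hdedup]
  rw [hlen]

-- the two connectivities compared -------------------------------------------

theorem connA_to_connT (ws : List String) {x y : String}
    (h : ConnW (pvEdgeAW ws) ws x y) : ConnW pvSimW ws x y := by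
  refine Relation.ReflTransGen.mono ?_ h
  intro a b hab
  refine ⟨hab.1, hab.2.1, ?_⟩
  have h2 := hab.2.2
  unfold pvEdgeAW at h2
  simp only [Bool.and_eq_true] at h2
  exact h2.1

theorem notD_conn_iff (words : List String) (hND : ¬ D_similar_word_groups words) :
    ∀ x y, ConnW pvSimW words x y ↔ ConnW (pvEdgeAW words) words x y := by
  have hall : ∀ x ∈ words, ∀ y ∈ words, pvSimW x y = true → ConnW (pvEdgeAW words) words x y := by
    intro x hx y hy hsim
    by_contra hA
    exact hND ⟨x, hx, y, hy, hsim,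
      fun hc => hA ((pvConnW_iff (pvEdgeAW words) words x y hx).1 ((connA_iff words x y).1 hc))⟩
  intro x y
  constructor
  · intro hT
    induction hT with
    | refl => exact Relation.ReflTransGen.refl
    | tail hc hst ih => exact ih.trans (hall _ hst.1 _ hst.2.1 hst.2.2)
  · exact connA_to_connT words

-- strictness inside D_ ------------------------------------------------------

theorem exists_first (P : String → Prop) :
    ∀ (l : List String), (∃ t ∈ l, P t) →
      ∃ pre s post, l = pre ++ s :: post ∧ P s ∧ ∀ t ∈ pre, ¬ P t := by
  intro l
  induction l with
  | nil => rintro ⟨t, ht, -⟩; exact absurd ht (List.not_mem_nil)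
  | cons a l ih =>
    intro hex
    by_cases ha : P a
    · exact ⟨[], a, l, rfl, ha, by simp⟩
    · have hex' : ∃ t ∈ l, P t := by
        rcases hex with ⟨t, ht, hP⟩
        rcases List.mem_cons.1 ht with hta | ht
        · exact absurd (hta ▸ hP) ha
        · exact ⟨t, ht, hP⟩
      obtain ⟨pre, s, post, heq, hPs, hpre⟩ := ih hex'
      refine ⟨a :: pre, s, post, by rw [heq, List.cons_append], hPs, ?_⟩
      intro t ht
      rcases List.mem_cons.1 ht with hta | ht
      · exact hta ▸ ha
      · exact hpre t ht

theorem two_splits {s s' : String} :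
    ∀ (pre pre' post post' : List String), pre ++ s :: post = pre' ++ s' :: post' →
      s ≠ s' → s' ∈ pre ∨ s ∈ pre' := by
  intro pre
  induction pre with
  | nil =>
    intro pre' post post' heq hne
    cases pre' with
    | nil =>
      simp only [List.nil_append, List.cons.injEq] at heq
      exact absurd heq.1 hne
    | cons a pre'' =>
      simp only [List.nil_append, List.cons_append, List.cons.injEq] at heq
      exact Or.inr (by rw [heq.1]; exact List.mem_cons_self)
  | cons a pre₂ ih =>
    intro pre' post post' heq hne
    cases pre' with
    | nil =>
      simp only [List.cons_append, List.nil_append, List.cons.injEq] at heq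
      exact Or.inl (by rw [← heq.1]; exact List.mem_cons_self)
    | cons a' pre'' =>
      simp only [List.cons_append, List.cons.injEq] at heq
      rcases ih pre'' post post' heq.2 hne with h | h
      · exact Or.inl (List.mem_cons_of_mem _ h)
      · exact Or.inr (List.mem_cons_of_mem _ h)

theorem reps_append (C : String → String → Prop) :
    ∀ (l₁ l₂ seen : List String),
      repsList C seen (l₁ ++ l₂) = repsList C seen l₁ ++ repsList C (seen ++ l₁) l₂ := by
  intro l₁
  induction l₁ with
  | nil => intro l₂ seen; simp [repsList]
  | cons s l₁ ih =>
    intro l₂ seen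
    by_cases hex : ∃ t ∈ seen, C t s
    · rw [show (s :: l₁) ++ l₂ = s :: (l₁ ++ l₂) from rfl]
      simp only [repsList, if_pos hex]
      rw [ih l₂ (seen ++ [s]), List.append_cons seen s l₁]
    · rw [show (s :: l₁) ++ l₂ = s :: (l₁ ++ l₂) from rfl]
      simp only [repsList, if_neg hex]
      rw [List.cons_append, ih l₂ (seen ++ [s]), List.append_cons seen s l₁]

theorem reps_strict (CA CT : String → String → Prop)
    (hmono : ∀ {a b}, CA a b → CT a b)
    (ws pre post : List String) (s : String) (heq : ws = pre ++ s :: post)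
    (hgapT : ∃ t ∈ pre, CT t s) (hgapA : ¬ ∃ t ∈ pre, CA t s) :
    (repsList CT [] ws).length < (repsList CA [] ws).length := by
  rw [heq, reps_append, reps_append]
  simp only [List.nil_append]
  have hA : repsList CA pre (s :: post) = s :: repsList CA (pre ++ [s]) post := by
    simp only [repsList, if_neg hgapA]
  have hT : repsList CT pre (s :: post) = repsList CT (pre ++ [s]) post := by
    simp only [repsList, if_pos hgapT]
  rw [hA, hT]
  have h1 := reps_length_le CA CT (fun h => hmono h) pre []
  have h2 := reps_length_le CA CT (fun h => hmono h) post (pre ++ [s])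
  simp only [List.length_append, List.length_cons]
  omega

-- ===== VERDICT (by name: the statement is the Claim_ definition above) =====
theorem similar_word_groups_spec : Claim_unchanged_similar_word_groups := by
  intro words _ hpre
  unfold Spec_similar_word_groups
  intro hND
  rw [A_eq_reps words hpre, B_eq_reps words hpre]
  rw [reps_congr (ConnW (pvEdgeAW words) words) (ConnW pvSimW words)
    (fun x y => (notD_conn_iff words hND x y).symm) words []]

theorem similar_word_groups_changed : Claim_changed_similar_word_groups := by
  unfold Claim_changed_similar_word_groups; decide

theorem similar_word_groups_tight : Claim_exact_similar_word_groups := by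
  intro words _ hpre hD
  obtain ⟨x, hx, y, hy, hsim, hcA⟩ := hD
  have hT : ConnW pvSimW words x y := Relation.ReflTransGen.single ⟨hx, hy, hsim⟩
  have hA : ¬ ConnW (pvEdgeAW words) words x y := fun h =>
    hcA ((connA_iff words x y).2 ((pvConnW_iff (pvEdgeAW words) words x y hx).2 h))
  set CA := ConnW (pvEdgeAW words) words with hCA
  set CT := ConnW pvSimW words with hCT
  have hCAsymm : ∀ {a b}, CA a b → CA b a := by
    intro a b h
    refine ConnW_symm (pvEdgeAW words) ?_ words h
    intro u v
    unfold pvEdgeAW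
    rw [pvSimW_symm]
    congr 1
    rw [decide_eq_decide]
    exact Or.comm
  have hCTsymm : ∀ {a b}, CT a b → CT b a :=
    fun h => ConnW_symm pvSimW pvSimW_symm words h
  -- first element of ws connected (in A's graph) to y, resp. to x
  obtain ⟨pre, sy, post, heq, hPsy, hprey⟩ := exists_first (fun t => CA t y) words
    ⟨y, hy, Relation.ReflTransGen.refl⟩
  obtain ⟨pre', sx, post', heq', hPsx, hprex⟩ := exists_first (fun t => CA t x) words
    ⟨x, hx, Relation.ReflTransGen.refl⟩
  have hne : sy ≠ sx := by
    intro h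
    have h1 : CA sx y := h ▸ hPsy
    exact hA (hCAsymm (Relation.ReflTransGen.trans (hCAsymm h1) hPsx))
  have hmono : ∀ {a b}, CA a b → CT a b := fun h => connA_to_connT words h
  have hww : pre ++ sy :: post = pre' ++ sx :: post' := by rw [← heq, ← heq']
  have hstrict : (repsList CT [] words).length < (repsList CA [] words).length := by
    rcases two_splits pre pre' post post' hww hne with hmem | hmem
    · refine reps_strict CA CT hmono words pre post sy heq ⟨sx, hmem, ?_⟩ ?_
      · exact Relation.ReflTransGen.trans (hmono hPsx)
          (Relation.ReflTransGen.trans hT (hCTsymm (hmono hPsy)))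
      · rintro ⟨t, ht, hC⟩
        exact hprey t ht (Relation.ReflTransGen.trans hC hPsy)
    · refine reps_strict CA CT hmono words pre' post' sx heq' ⟨sy, hmem, ?_⟩ ?_
      · exact Relation.ReflTransGen.trans (hmono hPsy)
          (Relation.ReflTransGen.trans (hCTsymm hT) (hCTsymm (hmono hPsx)))
      · rintro ⟨t, ht, hC⟩
        exact hprex t ht (Relation.ReflTransGen.trans hC hPsx)
  have hAv := A_eq_reps words hpre
  have hBv := B_eq_reps words hpre
  rw [hAv, hBv]
  intro hcontra
  have : (repsList CA [] words).length = (repsList CT [] words).length := by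
    exact_mod_cast hcontra
  omega
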